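-- pv_equiv track=rewrite | github.com/Jullan-M/TDT4120_2020 | Exercise 9/clustering.py | find_animal_groups
-- ===== SOURCE A (Python) =====
-- class Animal:
--     def __init__(self, anid : int):
--         self.id = anid
--         self.parent = self
--         self.rank = 0
--
--     def link(self, other):
--         if self.rank > other.rank:
--             other.parent = self
--         else:
--             self.parent = other
--             if self.rank == other.rank:
--                 other.rank += 1
--
--     def find_parent(self):
--         if self.parent != self:
--             self.parent = self.parent.find_parent()
--         return self.parent
--
--     def union(self, other):
--         self.find_parent().link(other.find_parent())
--
-- def hamming_distance(s1, s2):
--     n = len(s1)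
--     matches = 0
--     for c in range(n):
--         if s1[c] == s2[c]:
--             matches += 1
--     return n - matches
--
-- def find_clusters(E, n, k):
--     """
--     Finner k klynger ved hjelp av kantene i E. Kantenen i E er på
--     formatet (i, j, avstand), hvor i og j er indeksen til noden (dyret)
--     kanten knytter sammen og avstand er Hamming-avstanden mellom
--     gensekvensen til dyrene. Funksjonen returnerer en liste av k
--     lister. Hvor de indre listene representerer en klynge og består av
--     indeksene til nodene (dyrene). F.eks. har vi tre dyr som skal
--     i to klynger, hvor dyr 0 og 2 ender i samme klynge returnerer
--     funksjonen [[0, 2], [1]].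
--
--     :param E: Kanter i grafen på formatet (i, j, avstand). i og j er
--               indeksen til dyrene kanten går mellom.
--     :param n: Antall noder
--     :param k: Antall klynger som ønskes
--     :return: En liste av k liste .
--     """
--     clusters = {}
--     cl = n
--     nodes = [Animal(i) for i in range(n)]
--     edges = sorted(E, key=lambda anim : anim[2]) # Sort edges from min to max
--     for e in edges:
--         if cl == k: # Break if there are k clusters
--             break
--         u, v = nodes[e[0]], nodes[e[1]]
--         if u.find_parent() != v.find_parent():
--             cl -= 1
--             u.union(v)
--
--     for node in nodes:
--         i = node.find_parent().id
--         if not (i in clusters):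
--             clusters[i] = []
--         clusters[i].append(node.id)
--     return clusters.values()
--
-- def find_animal_groups(animals, k):
--     # Lager kanter basert på Hamming-avstand
--     E = []
--     for i in range(len(animals)):
--         for j in range(i + 1, len(animals)):
--             E.append((i, j, hamming_distance(animals[i][1], animals[j][1])))
--
--     # Finner klynger
--     clusters = find_clusters(E, len(animals), k)
--
--     # Gjøre om fra klynger basert på indekser til klynger basert på dyrenavn
--     animal_clusters = [
--         [animals[i][0] for i in cluster] for cluster in clusters
--     ]
--     return animal_clusters
-- ===== SOURCE B (Python) =====
-- def find_animal_groups(animals, k):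
--     # Naive agglomerative single-linkage clustering over explicit member lists:
--     # repeatedly merge the closest pair of clusters (first edge in the stable
--     # distance-sorted list whose endpoints lie in different clusters) until k
--     # clusters remain or everything has been merged.
--     n = len(animals)
--     edges = [(i, j, sum(animals[i][1][c] != animals[j][1][c]
--                         for c in range(len(animals[i][1]))))
--              for i in range(n) for j in range(i + 1, n)]
--     edges.sort(key=lambda e: e[2])
--     groups = [[i] for i in range(n)]
--     while len(groups) != k:
--         lab = [0] * n
--         for gi, g in enumerate(groups):
--             for x in g:
--                 lab[x] = gi
--         best = None
--         for e in edges: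
--             if lab[e[0]] != lab[e[1]]:
--                 best = e
--                 break
--         if best is None:
--             break
--         a, b = lab[best[0]], lab[best[1]]
--         if a > b:
--             a, b = b, a
--         groups[a] = sorted(groups[a] + groups[b])
--         del groups[b]
--     return [[animals[i][0] for i in g] for g in groups]
-- ===== Notes on version B (the rewrite author's own statement) =====
-- stated objective: alternative
-- what changed: Replaced the union-find (path compression + union by rank) Kruskal pass and dict-based cluster extraction by naive agglomerative clustering over explicit sorted member lists: each round relabels nodes, scans the distance-sorted edge list for the first edge joining two different clusters and merges those two member lists in place, so the output order falls out directly without a dict.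
import Mathlib
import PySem

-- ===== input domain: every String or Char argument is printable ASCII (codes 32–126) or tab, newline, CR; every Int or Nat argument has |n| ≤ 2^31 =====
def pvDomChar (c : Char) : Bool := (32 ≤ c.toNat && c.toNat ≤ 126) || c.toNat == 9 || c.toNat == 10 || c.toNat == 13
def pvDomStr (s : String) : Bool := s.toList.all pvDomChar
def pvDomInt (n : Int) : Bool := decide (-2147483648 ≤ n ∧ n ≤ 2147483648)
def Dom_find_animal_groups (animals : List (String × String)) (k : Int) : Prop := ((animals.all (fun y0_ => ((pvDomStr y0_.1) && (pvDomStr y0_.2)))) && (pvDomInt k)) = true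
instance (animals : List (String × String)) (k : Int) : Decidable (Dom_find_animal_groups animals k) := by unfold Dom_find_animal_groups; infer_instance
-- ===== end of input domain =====

-- B replaces A's union-find Kruskal pass and dict extraction by naive agglomerative
-- clustering over explicit sorted member lists (alternative decomposition, same results).

-- ===== PORT A =====

-- hamming_distance: n = len(s1); counts matching positions, indexes s2 by s1's range.
-- (out-of-range s2[c] raises in Python; excluded by Pre_, defaults here are arbitrary)
def pvHamA (s1 s2 : List Char) : Int :=
  let n := s1.length
  (n : Int) - (List.range n).foldl (fun m c => if s1.getD c ' ' = s2.getD c '?' then m + 1 else m) (0 : Int)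

-- E built by the nested for-loops with E.append (range(i+1, n) ported as List.range')
def pvEdgesA (gs : List (List Char)) (n : Nat) : List (Nat × Nat × Int) :=
  (List.range n).foldl (fun E i =>
    (List.range' (i + 1) (n - (i + 1))).foldl (fun E' j =>
      E' ++ [(i, j, pvHamA (gs.getD i []) (gs.getD j []))]) E) []

-- find_parent with path compression; parents as a list indexed by id; fuel (= n at call
-- sites) only makes the Python recursion structurally total, it is never exhausted.
def pvFind : Nat → List Nat → Nat → List Nat × Nat
  | 0, p, i => (p, i)
  | fuel + 1, p, i =>
    let pi := p.getD i i
    if pi = i then (p, i)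
    else
      let pr := pvFind fuel p pi
      (pr.1.set i pr.2, pr.2)

-- link (called on roots a := ru, b := rv), with the rank lists threaded through
def pvLink (p rk : List Nat) (a b : Nat) : (List Nat × List Nat) :=
  if rk.getD a 0 > rk.getD b 0 then (p.set b a, rk)
  else
    let p' := p.set a b
    if rk.getD a 0 = rk.getD b 0 then (p', rk.set b (rk.getD b 0 + 1)) else (p', rk)

-- the edge loop of find_clusters (checks cl == k, finds roots, unions)
def pvLoopA (k : Int) (n : Nat) : List (Nat × Nat × Int) → Int → List Nat → List Nat → (List Nat × List Nat)
  | [], _, p, rk => (p, rk)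
  | e :: rest, cl, p, rk =>
    if cl = k then (p, rk)
    else
      let f1 := pvFind n p e.1
      let f2 := pvFind n f1.1 e.2.1
      if f1.2 ≠ f2.2 then
        -- u.union(v) = u.find_parent().link(v.find_parent())
        let f3 := pvFind n f2.1 e.1
        let f4 := pvFind n f3.1 e.2.1
        let lk := pvLink f4.1 rk f3.2 f4.2
        pvLoopA k n rest (cl - 1) lk.1 lk.2
      else pvLoopA k n rest cl f2.1 rk

-- the clusters-dict loop of find_clusters (find_parent keeps mutating the parents)
def pvCollect (n : Nat) (p : List Nat) : List Nat × PySem.Dict Nat (List Nat) :=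
  (List.range n).foldl (fun st i =>
    let f := pvFind n st.1 i
    (f.1, st.2.insert f.2 (st.2.getD f.2 [] ++ [i]))) (p, PySem.Dict.empty)

def find_animal_groups (animals : List (String × String)) (k : Int) : List (List String) :=
  let n := animals.length
  let E := pvEdgesA (animals.map (fun a => a.2.toList)) n
  let S := PySem.List.sorted E (fun e => e.2.2) false
  let fin := pvLoopA k n S (n : Int) (List.range n) (List.replicate n 0)
  let d := (pvCollect n fin.1).2
  d.values.map (fun c => c.map (fun i => (animals.getD i ("", "")).1))

-- ===== PORT B =====

-- Source B's distance: sum(s1[c] != s2[c] for c in range(len(s1))) — a mismatch count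
-- (out-of-range s2[c] raises in Python exactly as in A; excluded by Pre_)
def pvHamB (s1 s2 : List Char) : Int :=
  (((List.range s1.length).countP (fun c => !(s1.getD c ' ' == s2.getD c '?')) : Nat) : Int)

-- the edge comprehension of Source B
def pvEdgesB (gs : List (List Char)) (n : Nat) : List (Nat × Nat × Int) :=
  (List.range n).flatMap (fun i =>
    (List.range' (i + 1) (n - (i + 1))).map (fun j => (i, j, pvHamB (gs.getD i []) (gs.getD j []))))

-- lab = [0]*n; for gi, g in enumerate(groups): for x in g: lab[x] = gi
def pvLab (n : Nat) (G : List (List Nat)) : List Nat :=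
  G.zipIdx.foldl (fun lab gg => gg.1.foldl (fun lab' x => lab'.set x gg.2) lab) (List.replicate n 0)

-- the while-loop of Source B: merge the first cross-cluster edge of the sorted list until
-- k clusters remain or none crosses (the b < length guard only makes deletion total)
def pvLoopB (k : Int) (S : List (Nat × Nat × Int)) (n : Nat) : Nat → List (List Nat) → List (List Nat)
  | 0, G => G
  | fuel + 1, G =>
    if (G.length : Int) = k then G
    else
      let lab := pvLab n G
      match S.find? (fun e => lab.getD e.1 0 ≠ lab.getD e.2.1 0) with
      | none => G
      | some e =>
        let a0 := lab.getD e.1 0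
        let b0 := lab.getD e.2.1 0
        let a := if a0 > b0 then b0 else a0
        let b := if a0 > b0 then a0 else b0
        if b < G.length then
          pvLoopB k S n fuel ((G.set a (PySem.List.sorted (G.getD a [] ++ G.getD b []) (fun x => x) false)).eraseIdx b)
        else G

def find_animal_groups_alt (animals : List (String × String)) (k : Int) : List (List String) :=
  let n := animals.length
  let S := PySem.List.sorted (pvEdgesB (animals.map (fun a => a.2.toList)) n) (fun e => e.2.2) false
  let G := pvLoopB k S n (n + 1) ((List.range n).map (fun i => [i]))
  G.map (fun g => g.map (fun i => (animals.getD i ("", "")).1))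

-- ===== PRECONDITION & SPEC =====

-- A (and B alike) raises IndexError in its distance computation as soon as some later
-- gene string is shorter than an earlier one; Pre_ admits exactly the inputs where
-- Python's A returns normally.
def Pre_find_animal_groups (animals : List (String × String)) (k : Int) : Prop :=
  (animals.map (fun a => a.2.toList.length)).Pairwise (· ≤ ·)

instance (animals : List (String × String)) (k : Int) : Decidable (Pre_find_animal_groups animals k) := by
  unfold Pre_find_animal_groups; infer_instance

def pvWitness_find_animal_groups : (List (String × String)) × Int := ([("a", "x"), ("b", "y")], 1)

def Spec_find_animal_groups (animals : List (String × String)) (k : Int) (out : List (List String)) : Prop :=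
  out = find_animal_groups_alt animals k

instance (animals : List (String × String)) (k : Int) (out : List (List String)) : Decidable (Spec_find_animal_groups animals k out) := by
  unfold Spec_find_animal_groups; infer_instance

-- ===== CLAIM (what is proved, stated in full; the proofs are below) =====

def Claim_equal_find_animal_groups : Prop := ∀ (animals : List (String × String)) (k : Int), Dom_find_animal_groups animals k → Pre_find_animal_groups animals k → Spec_find_animal_groups animals k (find_animal_groups animals k)

-- ===== LEMMAS AND PROOFS =====

-- ---------- generic getD/set helpers ----------

theorem pvGetD_set_ne (p : List Nat) (i x j d : Nat) (h : j ≠ i) :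
    (p.set i x).getD j d = p.getD j d := by
  simp [List.getD_eq_getElem?_getD, List.getElem?_set_ne (Ne.symm h)]

theorem pvGetD_set_self (p : List Nat) (i x d : Nat) (h : i < p.length) :
    (p.set i x).getD i d = x := by
  simp [List.getD_eq_getElem?_getD, List.getElem?_set_self h]

theorem pvGetD_lt_length (p : List Nat) (i : Nat) (h : p.getD i i ≠ i) : i < p.length := by
  by_contra hc
  push_neg at hc
  exact h (by simp [List.getD_eq_getElem?_getD, List.getElem?_eq_none (by omega : p.length ≤ i)])

-- ---------- parent-pointer chains ----------

def pvChain (p : List Nat) : Nat → Nat → Nat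
  | 0, i => i
  | m + 1, i => pvChain p m (p.getD i i)

theorem pvChain_succ (p : List Nat) (m i : Nat) : pvChain p (m + 1) i = pvChain p m (p.getD i i) := rfl

theorem pvChain_fix (p : List Nat) (r : Nat) (hr : p.getD r r = r) : ∀ m, pvChain p m r = r
  | 0 => rfl
  | m + 1 => by rw [pvChain_succ, hr]; exact pvChain_fix p r hr m

theorem pvChain_add (p : List Nat) : ∀ (a b i : Nat), pvChain p (a + b) i = pvChain p b (pvChain p a i)
  | 0, b, i => by rw [Nat.zero_add]; rfl
  | a + 1, b, i => by
    rw [show a + 1 + b = (a + b) + 1 by omega, pvChain_succ, pvChain_succ]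
    exact pvChain_add p a b (p.getD i i)

theorem pvChain_det (p : List Nat) {i r r' m m' : Nat}
    (h1 : pvChain p m i = r) (hr : p.getD r r = r)
    (h2 : pvChain p m' i = r') (hr' : p.getD r' r' = r') : r = r' := by
  rcases Nat.le_total m m' with h | h
  · have : pvChain p (m + (m' - m)) i = r := by
      rw [pvChain_add, h1]; exact pvChain_fix p r hr _
    rw [show m + (m' - m) = m' by omega, h2] at this
    exact this.symm
  · have : pvChain p (m' + (m - m')) i = r' := by
      rw [pvChain_add, h2]; exact pvChain_fix p r' hr' _
    rw [show m' + (m - m') = m by omega, h1] at this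
    exact this

-- pvImp p q: q keeps every fixpoint of p and every reachability fact, with no-larger bounds
def pvImp (p q : List Nat) : Prop :=
  q.length = p.length ∧ ∀ j s ρ, pvChain p s j = ρ → p.getD ρ ρ = ρ →
    q.getD ρ ρ = ρ ∧ ∃ s' ≤ s, pvChain q s' j = ρ

theorem pvImp_refl (p : List Nat) : pvImp p p :=
  ⟨rfl, fun _ s _ h hf => ⟨hf, s, le_refl s, h⟩⟩

theorem pvImp_trans {p q r : List Nat} (h1 : pvImp p q) (h2 : pvImp q r) : pvImp p r := by
  refine ⟨h1.1 ▸ h2.1, fun j s ρ hch hfix => ?_⟩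
  obtain ⟨hfx, s', hs', hch'⟩ := h1.2 j s ρ hch hfix
  obtain ⟨hfx2, s'', hs'', hch''⟩ := h2.2 j s' ρ hch' hfx
  exact ⟨hfx2, s'', le_trans hs'' hs', hch''⟩

theorem pvImp_set_root (p : List Nat) (i r a : Nat)
    (hi : p.getD i i ≠ i) (hc : pvChain p a i = r) (hr : p.getD r r = r) :
    pvImp p (p.set i r) := by
  have hlen : i < p.length := pvGetD_lt_length p i hi
  have hri : r ≠ i := fun he => hi (he ▸ hr)
  refine ⟨List.length_set, ?_⟩
  intro j s ρ
  induction s using Nat.strong_induction_on generalizing j with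
  | _ s IH =>
    intro hch hfix
    have hρi : ρ ≠ i := fun he => hi (he ▸ hfix)
    refine ⟨by rw [pvGetD_set_ne p i r ρ ρ hρi]; exact hfix, ?_⟩
    by_cases hj : j = ρ
    · exact ⟨0, Nat.zero_le s, hj⟩
    · obtain ⟨s', rfl⟩ : ∃ s', s = s' + 1 := by
        cases s with
        | zero => exact absurd hch hj
        | succ t => exact ⟨t, rfl⟩
      have hch' : pvChain p s' (p.getD j j) = ρ := hch
      by_cases hji : j = i
      · subst hji
        have hrρ : r = ρ := pvChain_det p hc hr hch hfix
        refine ⟨1, by omega, ?_⟩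
        rw [pvChain_succ, pvGetD_set_self p j r j hlen, ← hrρ]
        exact pvChain_fix (p.set j r) r (by rw [pvGetD_set_ne p j r r r hri]; exact hr) 0
      · obtain ⟨_, t, ht, hcht⟩ := IH s' (by omega) (p.getD j j) hch' hfix
        refine ⟨t + 1, by omega, ?_⟩
        rw [pvChain_succ, pvGetD_set_ne p i r j j hji]
        exact hcht

theorem pvFind_succ_eq (fuel : Nat) (p : List Nat) (i : Nat) :
    pvFind (fuel + 1) p i = (if p.getD i i = i then (p, i)
      else ((pvFind fuel p (p.getD i i)).1.set i (pvFind fuel p (p.getD i i)).2,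
            (pvFind fuel p (p.getD i i)).2)) := by
  show (let pi := p.getD i i; if pi = i then (p, i) else
    let pr := pvFind fuel p pi; (pr.1.set i pr.2, pr.2)) = _
  by_cases h : p.getD i i = i <;> simp [h]

theorem pvFind_spec : ∀ (fuel : Nat) (p : List Nat) (i r m : Nat), m < fuel →
    pvChain p m i = r → p.getD r r = r →
    (pvFind fuel p i).2 = r ∧ pvImp p (pvFind fuel p i).1 := by
  intro fuel
  induction fuel with
  | zero => intro p i r m hm; omega
  | succ fuel IH =>
    intro p i r m hm hc hr
    by_cases hpi : p.getD i i = i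
    · have hred : pvFind (fuel + 1) p i = (p, i) := by rw [pvFind_succ_eq, if_pos hpi]
      have hri : r = i := by rw [pvChain_fix p i hpi m] at hc; exact hc.symm
      rw [hred]; exact ⟨hri.symm, pvImp_refl p⟩
    · have hm0 : m ≠ 0 := by
        rintro rfl
        have : i = r := hc
        exact hpi (this ▸ hr)
      obtain ⟨m', rfl⟩ : ∃ m', m = m' + 1 := ⟨m - 1, by omega⟩
      have hc' : pvChain p m' (p.getD i i) = r := hc
      obtain ⟨h2, himp⟩ := IH p (p.getD i i) r m' (by omega) hc' hr
      have hred : pvFind (fuel + 1) p i =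
          ((pvFind fuel p (p.getD i i)).1.set i (pvFind fuel p (p.getD i i)).2,
            (pvFind fuel p (p.getD i i)).2) := by
        rw [pvFind_succ_eq, if_neg hpi]
      obtain ⟨hfx1, s', hs', hch1⟩ := himp.2 i (m' + 1) r hc hr
      have hine : (pvFind fuel p (p.getD i i)).1.getD i i ≠ i := by
        intro he
        have : r = i := by
          rw [pvChain_fix _ i he s'] at hch1; exact hch1.symm
        exact hpi (this ▸ hr)
      rw [hred, h2]
      exact ⟨rfl, pvImp_trans himp (pvImp_set_root _ i r s' hine hch1 hfx1)⟩

-- ---------- linking two roots ----------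

theorem pvLink_keep (p : List Nat) (ra rb : Nat) (hra : p.getD ra ra = ra) :
    ∀ s j ρ, pvChain p s j = ρ → p.getD ρ ρ = ρ → ρ ≠ ra →
    (p.set ra rb).getD ρ ρ = ρ ∧ ∃ s' ≤ s, pvChain (p.set ra rb) s' j = ρ := by
  intro s
  induction s using Nat.strong_induction_on with
  | _ s IH =>
    intro j ρ hch hfix hρ
    refine ⟨by rw [pvGetD_set_ne p ra rb ρ ρ hρ]; exact hfix, ?_⟩
    by_cases hj : j = ρ
    · exact ⟨0, Nat.zero_le s, hj⟩
    · obtain ⟨s', rfl⟩ : ∃ s', s = s' + 1 := by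
        cases s with
        | zero => exact absurd hch hj
        | succ t => exact ⟨t, rfl⟩
      have hjra : j ≠ ra := by
        intro he; subst he
        rw [pvChain_fix p j hra (s' + 1)] at hch
        exact hρ hch.symm
      obtain ⟨_, t, ht, hcht⟩ := IH s' (by omega) (p.getD j j) ρ hch hfix hρ
      refine ⟨t + 1, by omega, ?_⟩
      rw [pvChain_succ, pvGetD_set_ne p ra rb j j hjra]
      exact hcht

theorem pvLink_move (p : List Nat) (ra rb : Nat) (hra : p.getD ra ra = ra)
    (hlen : ra < p.length) (hrb : p.getD rb rb = rb) (hne : rb ≠ ra) :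
    ∀ s j, pvChain p s j = ra → ∃ s' ≤ s + 1, pvChain (p.set ra rb) s' j = rb := by
  intro s
  induction s using Nat.strong_induction_on with
  | _ s IH =>
    intro j hch
    by_cases hj : j = ra
    · subst hj
      refine ⟨1, by omega, ?_⟩
      rw [pvChain_succ, pvGetD_set_self p j rb j hlen]
      exact pvChain_fix (p.set j rb) rb (by rw [pvGetD_set_ne p j rb rb rb hne]; exact hrb) 0
    · obtain ⟨s', rfl⟩ : ∃ s', s = s' + 1 := by
        cases s with
        | zero => exact absurd hch hj
        | succ t => exact ⟨t, rfl⟩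
      obtain ⟨t, ht, hcht⟩ := IH s' (by omega) (p.getD j j) hch
      refine ⟨t + 1, by omega, ?_⟩
      rw [pvChain_succ, pvGetD_set_ne p ra rb j j hj]
      exact hcht

-- ---------- the coupling invariants ----------

def Rooted (p : List Nat) (g : List Nat) (r : Nat) : Prop :=
  r ∈ g ∧ p.getD r r = r ∧ ∀ i ∈ g, ∃ m, m + 1 ≤ g.length ∧ pvChain p m i = r

def PartOK (n : Nat) (G : List (List Nat)) : Prop :=
  G.flatten.Perm (List.range n) ∧ (∀ g ∈ G, g ≠ [] ∧ g.Pairwise (· < ·)) ∧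
  (G.map (fun g => g.headD 0)).Pairwise (· < ·)

def UFOK (n : Nat) (p : List Nat) (G : List (List Nat)) (rt : List Nat) : Prop :=
  p.length = n ∧ rt.length = G.length ∧
  ∀ gi, gi < G.length → Rooted p (G.getD gi []) (rt.getD gi 0)

theorem Rooted_imp {p q : List Nat} {g : List Nat} {r : Nat}
    (h : pvImp p q) (hr : Rooted p g r) : Rooted q g r := by
  obtain ⟨hm, hf, hc⟩ := hr
  obtain ⟨m0, hb0, hc0⟩ := hc r hm
  have hfq := (h.2 r m0 r hc0 hf).1
  refine ⟨hm, hfq, fun i hi => ?_⟩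
  obtain ⟨m, hb, hcm⟩ := hc i hi
  obtain ⟨_, s', hs', hcs'⟩ := h.2 i m r hcm hf
  exact ⟨s', by omega, hcs'⟩

theorem UFOK_imp {n : Nat} {p q : List Nat} {G : List (List Nat)} {rt : List Nat}
    (h : pvImp p q) (hu : UFOK n p G rt) : UFOK n q G rt :=
  ⟨h.1.trans hu.1, hu.2.1, fun gi hgi => Rooted_imp h (hu.2.2 gi hgi)⟩

-- ---------- getD on in-range indices ----------

theorem pvGetD_eq {α : Type} (l : List α) (i : Nat) (d : α) (h : i < l.length) :
    l.getD i d = l[i] := by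
  simp [List.getD_eq_getElem?_getD, List.getElem?_eq_getElem h]

-- ---------- consequences of PartOK ----------

theorem PartOK_nodup {n : Nat} {G : List (List Nat)} (h : PartOK n G) : G.flatten.Nodup :=
  h.1.symm.nodup List.nodup_range

theorem PartOK_disj {n : Nat} {G : List (List Nat)} (h : PartOK n G) {gi gj x : Nat}
    (hgi : gi < G.length) (hgj : gj < G.length) (hne : gi ≠ gj)
    (hx : x ∈ G.getD gi []) (hy : x ∈ G.getD gj []) : False := by
  have hpw := (List.nodup_flatten.mp (PartOK_nodup h)).2
  rw [pvGetD_eq G gi [] hgi] at hx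
  rw [pvGetD_eq G gj [] hgj] at hy
  rcases Nat.lt_or_ge gi gj with hlt | hge
  · exact (List.pairwise_iff_getElem.mp hpw gi gj hgi hgj hlt) hx hy
  · have hlt : gj < gi := by omega
    exact (List.pairwise_iff_getElem.mp hpw gj gi hgj hgi hlt) hy hx

theorem PartOK_mem_lt {n : Nat} {G : List (List Nat)} (h : PartOK n G) {gi x : Nat}
    (hgi : gi < G.length) (hx : x ∈ G.getD gi []) : x < n := by
  rw [pvGetD_eq G gi [] hgi] at hx
  have hmem : x ∈ G.flatten := List.mem_flatten.mpr ⟨G[gi], List.getElem_mem hgi, hx⟩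
  exact List.mem_range.mp (h.1.mem_iff.mp hmem)

theorem PartOK_size {n : Nat} {G : List (List Nat)} (h : PartOK n G) {gi : Nat}
    (hgi : gi < G.length) : (G.getD gi []).length ≤ n := by
  rw [pvGetD_eq G gi [] hgi]
  have hsub := List.sublist_flatten_of_mem (List.getElem_mem hgi)
  have := hsub.length_le
  have hlen : G.flatten.length = n := by rw [h.1.length_eq, List.length_range]
  omega

theorem UFOK_roots_ne {n : Nat} {p : List Nat} {G : List (List Nat)} {rt : List Nat}
    (hp : PartOK n G) (h : UFOK n p G rt) {gi gj : Nat}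
    (hgi : gi < G.length) (hgj : gj < G.length) (hne : gi ≠ gj) :
    rt.getD gi 0 ≠ rt.getD gj 0 := by
  intro he
  have h1 := (h.2.2 gi hgi).1
  have h2 := (h.2.2 gj hgj).1
  rw [he] at h1
  exact PartOK_disj hp hgi hgj hne h1 h2

theorem head_mem {g : List Nat} (hne : g ≠ []) : g.headD 0 ∈ g := by
  cases g with
  | nil => exact absurd rfl hne
  | cons a t => exact List.mem_cons_self

theorem head_min {g : List Nat} (hg : g.Pairwise (· < ·)) {x : Nat} (hx : x ∈ g) :
    g.headD 0 ≤ x := by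
  cases g with
  | nil => cases hx
  | cons a t =>
    rcases List.mem_cons.mp hx with rfl | hx'
    · exact le_refl x
    · exact le_of_lt ((List.pairwise_cons.mp hg).1 x hx')

-- ---------- the label array of B ----------

theorem pvLab_len1 : ∀ (g : List Nat) (gi : Nat) (lab : List Nat),
    (g.foldl (fun l y => l.set y gi) lab).length = lab.length := by
  intro g
  induction g with
  | nil => intro gi lab; rfl
  | cons a t IH => intro gi lab; rw [List.foldl_cons, IH, List.length_set]

theorem pvLab_aux1 : ∀ (g : List Nat) (gi : Nat) (lab : List Nat) (x : Nat), x ∉ g →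
    (g.foldl (fun l y => l.set y gi) lab).getD x 0 = lab.getD x 0 := by
  intro g
  induction g with
  | nil => intro gi lab x _; rfl
  | cons a t IH =>
    intro gi lab x hx
    rw [List.foldl_cons, IH gi _ x (fun h => hx (List.mem_cons_of_mem a h)),
      pvGetD_set_ne lab a gi x 0 (fun h => hx (h ▸ List.mem_cons_self))]

theorem pvLab_aux2 : ∀ (g : List Nat) (gi : Nat) (lab : List Nat) (x : Nat), x ∈ g →
    x < lab.length → (g.foldl (fun l y => l.set y gi) lab).getD x 0 = gi := by
  intro g
  induction g with
  | nil => intro gi lab x hx; cases hx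
  | cons a t IH =>
    intro gi lab x hx hlen
    rw [List.foldl_cons]
    by_cases hxt : x ∈ t
    · exact IH gi _ x hxt (by rw [List.length_set]; exact hlen)
    · have hxa : x = a := by
        rcases List.mem_cons.mp hx with h | h
        · exact h
        · exact absurd h hxt
      subst hxa
      rw [pvLab_aux1 t gi _ x hxt, pvGetD_set_self lab x gi 0 hlen]

theorem pvLab_aux3 : ∀ (L : List (List Nat × Nat)) (lab : List Nat) (x : Nat),
    (∀ gg ∈ L, x ∉ gg.1) →
    (L.foldl (fun lab gg => gg.1.foldl (fun lab' x => lab'.set x gg.2) lab) lab).getD x 0 = lab.getD x 0 := by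
  intro L
  induction L with
  | nil => intro lab x _; rfl
  | cons a t IH =>
    intro lab x hx
    rw [List.foldl_cons, IH _ x (fun gg hgg => hx gg (List.mem_cons_of_mem a hgg)),
      pvLab_aux1 a.1 a.2 lab x (hx a List.mem_cons_self)]

theorem pvLab_main : ∀ (Gs : List (List Nat)) (off : Nat) (lab : List Nat) (x gi : Nat)
    (hgi : gi < Gs.length), x ∈ Gs[gi] →
    (∀ j (hj : j < Gs.length), j ≠ gi → x ∉ Gs[j]) → x < lab.length →
    ((Gs.zipIdx off).foldl (fun lab gg => gg.1.foldl (fun lab' x => lab'.set x gg.2) lab) lab).getD x 0 = off + gi := by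
  intro Gs
  induction Gs with
  | nil => intro off lab x gi hgi; simp at hgi
  | cons g t IH =>
    intro off lab x gi hgi hx huniq hlen
    rw [List.zipIdx_cons, List.foldl_cons]
    cases gi with
    | zero =>
      have hx0 : x ∈ g := hx
      have hrest : ∀ gg ∈ t.zipIdx (off + 1), x ∉ gg.1 := by
        intro gg hgg hmem
        obtain ⟨hle, hlt, heq⟩ := List.mem_zipIdx (x := gg.1) (i := gg.2) hgg
        have hj : gg.2 - (off + 1) < t.length := by omega
        have : x ∈ t[gg.2 - (off + 1)] := heq ▸ hmem
        exact huniq (gg.2 - (off + 1) + 1) (by simpa using hj) (by omega) this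
      rw [pvLab_aux3 _ _ x hrest, pvLab_aux2 g off lab x hx0 hlen]
      omega
    | succ gi' =>
      have hgi' : gi' < t.length := by simpa using hgi
      have hx' : x ∈ t[gi'] := hx
      have huniq' : ∀ j (hj : j < t.length), j ≠ gi' → x ∉ t[j] := by
        intro j hj hne
        exact huniq (j + 1) (by simpa using hj) (by omega)
      have hlen' : x < (g.foldl (fun l y => l.set y off) lab).length := by
        rw [pvLab_len1]; exact hlen
      rw [IH (off + 1) _ x gi' hgi' hx' huniq' hlen']
      omega

theorem pvLab_spec {n : Nat} {G : List (List Nat)} (h : PartOK n G) {x gi : Nat}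
    (hgi : gi < G.length) (hx : x ∈ G.getD gi []) : (pvLab n G).getD x 0 = gi := by
  have hx' : x ∈ G[gi] := by rw [← pvGetD_eq G gi [] hgi]; exact hx
  have huniq : ∀ j (hj : j < G.length), j ≠ gi → x ∉ G[j] := by
    intro j hj hne hmem
    exact PartOK_disj h hj hgi hne (by rw [pvGetD_eq G j [] hj]; exact hmem) hx
  have := pvLab_main G 0 (List.replicate n 0) x gi hgi hx' huniq
    (by rw [List.length_replicate]; exact PartOK_mem_lt h hgi hx)
  unfold pvLab
  rw [this]
  omega

-- ---------- transferring Rooted across a link ----------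

theorem Rooted_keep {p : List Nat} {g : List Nat} {r rold rnew : Nat}
    (hro : p.getD rold rold = rold) (hr : Rooted p g r) (hne : r ≠ rold) :
    Rooted (p.set rold rnew) g r := by
  obtain ⟨hm, hfx, hc⟩ := hr
  refine ⟨hm, (pvLink_keep p rold rnew hro 0 r r rfl hfx hne).1, fun i hi => ?_⟩
  obtain ⟨m, hb, hcm⟩ := hc i hi
  obtain ⟨_, s', hs', hch⟩ := pvLink_keep p rold rnew hro m i r hcm hfx hne
  exact ⟨s', by omega, hch⟩

theorem Rooted_merge {p : List Nat} {ga gb mg : List Nat} {rold rnew : Nat}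
    (hmem : ∀ i, i ∈ mg ↔ i ∈ ga ∨ i ∈ gb)
    (hlen : mg.length = ga.length + gb.length)
    (hra : Rooted p ga rold) (hrb : Rooted p gb rnew)
    (hlt : rold < p.length) (hne : rnew ≠ rold) :
    Rooted (p.set rold rnew) mg rnew := by
  obtain ⟨hma, hfa, hca⟩ := hra
  obtain ⟨hmb, hfb, hcb⟩ := hrb
  have hganil : 1 ≤ ga.length := List.length_pos_of_mem hma
  have hgbnil : 1 ≤ gb.length := List.length_pos_of_mem hmb
  refine ⟨(hmem rnew).mpr (Or.inr hmb),
    (pvLink_keep p rold rnew hfa 0 rnew rnew rfl hfb hne).1, fun i hi => ?_⟩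
  rcases (hmem i).mp hi with h | h
  · obtain ⟨m, hb, hcm⟩ := hca i h
    obtain ⟨s', hs', hch⟩ := pvLink_move p rold rnew hfa hlt hfb hne m i hcm
    exact ⟨s', by omega, hch⟩
  · obtain ⟨m, hb, hcm⟩ := hcb i h
    obtain ⟨_, s', hs', hch⟩ := pvLink_keep p rold rnew hfa m i rnew hcm hfb hne
    exact ⟨s', by omega, hch⟩

-- ---------- the merged group ----------

theorem merge_headD {n : Nat} {G : List (List Nat)} (h : PartOK n G) {a b : Nat}
    (hab : a < b) (hb : b < G.length) :
    (PySem.List.sorted (G.getD a [] ++ G.getD b []) (fun x => x) false).headD 0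
      = (G.getD a []).headD 0 := by
  have ha : a < G.length := by omega
  have hperm := PySem.List.sorted_perm (G.getD a [] ++ G.getD b []) (fun x : Nat => x) false
  have hpw := PySem.List.sorted_pairwise (G.getD a [] ++ G.getD b []) (fun x : Nat => x)
  have hganil : G.getD a [] ≠ [] := by
    rw [pvGetD_eq G a [] ha]; exact (h.2.1 G[a] (List.getElem_mem ha)).1
  have hA : (G.getD a []).headD 0 ∈ G.getD a [] := head_mem hganil
  cases hmg : PySem.List.sorted (G.getD a [] ++ G.getD b []) (fun x : Nat => x) false with
  | nil =>
    rw [hmg] at hperm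
    have hle := hperm.length_eq
    rw [List.length_append] at hle
    simp only [List.length_nil] at hle
    have h0 : (G.getD a []).length = 0 := by omega
    exact absurd (List.eq_nil_of_length_eq_zero h0) hganil
  | cons hd tl =>
    rw [hmg] at hperm hpw
    have hdmem : hd ∈ G.getD a [] ++ G.getD b [] := hperm.mem_iff.mp List.mem_cons_self
    have hAmem : (G.getD a []).headD 0 ∈ hd :: tl :=
      hperm.mem_iff.mpr (List.mem_append_left _ hA)
    have h1 : hd ≤ (G.getD a []).headD 0 := by
      rcases List.mem_cons.mp hAmem with he | hin
      · omega
      · exact (List.pairwise_cons.mp hpw).1 _ hin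
    have h2 : (G.getD a []).headD 0 ≤ hd := by
      rcases List.mem_append.mp hdmem with hin | hin
      · exact head_min (by rw [pvGetD_eq G a [] ha]; exact (h.2.1 G[a] (List.getElem_mem ha)).2) hin
      · have hbmin : (G.getD b []).headD 0 ≤ hd :=
          head_min (by rw [pvGetD_eq G b [] hb]; exact (h.2.1 G[b] (List.getElem_mem hb)).2) hin
        have hheads := List.pairwise_iff_getElem.mp h.2.2 a b
          (by rw [List.length_map]; exact ha) (by rw [List.length_map]; exact hb) hab
        rw [List.getElem_map, List.getElem_map] at hheads
        rw [pvGetD_eq G a [] ha]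
        rw [pvGetD_eq G b [] hb] at hbmin
        omega
    have : hd = (G.getD a []).headD 0 := by omega
    simpa using this

theorem merge_decomp {G : List (List Nat)} (mg : List Nat) {a b : Nat}
    (hab : a < b) (hb : b < G.length) :
    (G.set a mg).eraseIdx b =
      G.take a ++ mg :: ((G.drop (a+1)).take (b - (a+1)) ++ (G.drop (a+1)).drop (b - (a+1) + 1)) := by
  have ha : a < G.length := by omega
  have h1 : (G.take a).length = a := by rw [List.length_take]; omega
  rw [List.set_eq_take_append_cons_drop, if_pos ha, List.eraseIdx_eq_take_drop_succ,
    List.take_append, List.drop_append, h1]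
  have h2 : List.take b (List.take a G) = List.take a G := List.take_of_length_le (by rw [h1]; omega)
  have h3 : List.drop (b+1) (List.take a G) = [] := List.drop_eq_nil_of_le (by rw [h1]; omega)
  have h4 : b - a = (b - (a+1)) + 1 := by omega
  have h5 : b + 1 - a = (b - (a+1)) + 1 + 1 := by omega
  rw [h2, h3, h4, h5, List.take_succ_cons, List.drop_succ_cons]
  simp

-- ---------- PartOK is preserved by a merge ----------

theorem merge_PartOK {n : Nat} {G : List (List Nat)} (h : PartOK n G) {a b : Nat}
    (hab : a < b) (hb : b < G.length) :
    PartOK n ((G.set a (PySem.List.sorted (G.getD a [] ++ G.getD b []) (fun x => x) false)).eraseIdx b) := by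
  have ha : a < G.length := by omega
  have hperm := PySem.List.sorted_perm (G.getD a [] ++ G.getD b []) (fun x : Nat => x) false
  have hga : G.getD a [] = G[a] := pvGetD_eq G a [] ha
  have hgb : G.getD b [] = G[b] := pvGetD_eq G b [] hb
  have hnd := List.nodup_flatten.mp (PartOK_nodup h)
  refine ⟨?_, ?_, ?_⟩
  · -- the flattened node sets are permutations
    have hj : b - (a+1) < (G.drop (a+1)).length := by rw [List.length_drop]; omega
    have hDj : (G.drop (a+1))[b - (a+1)]'hj = G[b]'hb := by
      rw [List.getElem_drop]
      simp only [show a + 1 + (b - (a+1)) = b from by omega]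
    have hDdec : G.drop (a+1) =
        (G.drop (a+1)).take (b-(a+1)) ++ G[b] :: (G.drop (a+1)).drop (b-(a+1)+1) := by
      conv_lhs => rw [← List.take_append_drop (b-(a+1)) (G.drop (a+1))]
      rw [List.drop_eq_getElem_cons hj, hDj]
    have hGdec : G = G.take a ++ G[a] :: G.drop (a+1) := by
      conv_lhs => rw [← List.take_append_drop a G, List.drop_eq_getElem_cons ha]
    rw [merge_decomp _ hab hb]
    refine List.perm_iff_count.mpr (fun v => ?_)
    have hcount := List.perm_iff_count.mp h.1 v
    have hcmg := List.perm_iff_count.mp hperm v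
    have e1 : G.flatten = (G.take a).flatten ++ (G[a] ++ (G.drop (a+1)).flatten) :=
      calc G.flatten = (G.take a ++ G.drop a).flatten := by rw [List.take_append_drop]
        _ = (G.take a ++ G[a] :: G.drop (a+1)).flatten := by rw [List.drop_eq_getElem_cons ha]
        _ = (G.take a).flatten ++ (G[a] ++ (G.drop (a+1)).flatten) := by
            rw [List.flatten_append, List.flatten_cons]
    have e2 : (G.drop (a+1)).flatten = ((G.drop (a+1)).take (b-(a+1))).flatten
        ++ (G[b] ++ ((G.drop (a+1)).drop (b-(a+1)+1)).flatten) :=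
      calc (G.drop (a+1)).flatten
          = ((G.drop (a+1)).take (b-(a+1)) ++ (G.drop (a+1)).drop (b-(a+1))).flatten := by
            rw [List.take_append_drop]
        _ = ((G.drop (a+1)).take (b-(a+1)) ++ (G.drop (a+1))[b-(a+1)] :: (G.drop (a+1)).drop (b-(a+1)+1)).flatten := by
            rw [List.drop_eq_getElem_cons hj]
        _ = ((G.drop (a+1)).take (b-(a+1))).flatten ++ (G[b] ++ ((G.drop (a+1)).drop (b-(a+1)+1)).flatten) := by
            rw [List.flatten_append, List.flatten_cons, hDj]
    rw [e1, e2, ← hga, ← hgb] at hcount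
    simp only [List.count_append] at hcount hcmg ⊢
    simp only [List.flatten_append, List.flatten_cons, List.count_append]
    omega
  · -- each group is nonempty and strictly increasing
    intro g hg
    have hg' : g ∈ G.set a (PySem.List.sorted (G.getD a [] ++ G.getD b []) (fun x => x) false) :=
      (List.eraseIdx_sublist _ b).subset hg
    rcases List.mem_or_eq_of_mem_set hg' with hgG | rfl
    · exact h.2.1 g hgG
    · constructor
      · have hlenmg := hperm.length_eq
        rw [List.length_append] at hlenmg
        have hpos : 0 < (G.getD a []).length := by
          rw [hga]
          exact List.length_pos_of_ne_nil (h.2.1 G[a] (List.getElem_mem ha)).1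
        intro hnil
        rw [hnil] at hlenmg
        simp only [List.length_nil] at hlenmg
        omega
      · have hnda : G[a].Nodup := hnd.1 _ (List.getElem_mem ha)
        have hndb : G[b].Nodup := hnd.1 _ (List.getElem_mem hb)
        have hdisj : G[a].Disjoint G[b] := List.pairwise_iff_getElem.mp hnd.2 a b ha hb hab
        have hndapp : (G.getD a [] ++ G.getD b []).Nodup := by
          rw [hga, hgb, List.nodup_append]
          exact ⟨hnda, hndb, fun x hx y hy hxy => hdisj hx (hxy ▸ hy)⟩
        have hndmg := hperm.symm.nodup hndapp
        have hple := PySem.List.sorted_pairwise (G.getD a [] ++ G.getD b []) (fun x : Nat => x)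
        exact (hple.and hndmg).imp (fun hc => lt_of_le_of_ne hc.1 hc.2)
  · -- the heads stay strictly increasing
    have hmap : ((G.set a (PySem.List.sorted (G.getD a [] ++ G.getD b []) (fun x => x) false)).eraseIdx b).map (fun g => g.headD 0)
        = ((G.map (fun g => g.headD 0)).set a
            ((PySem.List.sorted (G.getD a [] ++ G.getD b []) (fun x => x) false).headD 0)).eraseIdx b := by
      rw [← List.eraseIdx_map, List.map_set]
    rw [hmap]
    have hh : (PySem.List.sorted (G.getD a [] ++ G.getD b []) (fun x => x) false).headD 0
        = (G.map (fun g => g.headD 0))[a]'(by rw [List.length_map]; exact ha) := by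
      rw [List.getElem_map, merge_headD h hab hb, hga]
    rw [hh, List.set_getElem_self]
    exact List.Pairwise.sublist (List.eraseIdx_sublist _ b) h.2.2

-- ---------- UFOK is preserved by a merge + link ----------

theorem set_erase_getD {α : Type} (l : List α) (x : α) {a b : Nat}
    (hab : a < b) (hb : b < l.length) (d : α) (gi : Nat)
    (hgi : gi < ((l.set a x).eraseIdx b).length) :
    ((l.set a x).eraseIdx b).getD gi d =
      if gi < b then (if gi = a then x else l.getD gi d) else l.getD (gi + 1) d := by
  have hgi2 : gi < l.length - 1 := by
    have hlen : ((l.set a x).eraseIdx b).length = l.length - 1 := by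
      rw [List.length_eraseIdx, List.length_set, if_pos hb]
    exact hlen ▸ hgi
  rw [pvGetD_eq _ _ _ hgi, List.getElem_eraseIdx]
  by_cases hgb : gi < b
  · rw [dif_pos hgb, if_pos hgb]
    by_cases hga : gi = a
    · subst hga
      rw [List.getElem_set_self, if_pos rfl]
    · rw [List.getElem_set_ne (fun he => hga he.symm), if_neg hga,
        pvGetD_eq l gi d (by omega)]
  · rw [dif_neg hgb, if_neg hgb, List.getElem_set_ne (by omega : a ≠ gi + 1),
      pvGetD_eq l (gi + 1) d (by omega)]

theorem merge_UFOK {n : Nat} {p : List Nat} {G : List (List Nat)} {rt : List Nat}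
    (hp : PartOK n G) (hu : UFOK n p G rt) {a b : Nat} (hab : a < b) (hb : b < G.length)
    {rold rnew : Nat}
    (hro : (rold = rt.getD a 0 ∧ rnew = rt.getD b 0) ∨ (rold = rt.getD b 0 ∧ rnew = rt.getD a 0)) :
    UFOK n (p.set rold rnew)
      ((G.set a (PySem.List.sorted (G.getD a [] ++ G.getD b []) (fun x => x) false)).eraseIdx b)
      ((rt.set a rnew).eraseIdx b) := by
  have ha : a < G.length := by omega
  have hrtl : rt.length = G.length := hu.2.1
  have hpl : p.length = n := hu.1
  have hperm := PySem.List.sorted_perm (G.getD a [] ++ G.getD b []) (fun x : Nat => x) false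
  have hRa := hu.2.2 a ha
  have hRb := hu.2.2 b hb
  have hrne : rt.getD b 0 ≠ rt.getD a 0 := UFOK_roots_ne hp hu hb ha (by omega)
  have hfold : p.getD rold rold = rold := by
    rcases hro with ⟨h1, _⟩ | ⟨h1, _⟩
    · rw [h1]; exact hRa.2.1
    · rw [h1]; exact hRb.2.1
  have hfnew : p.getD rnew rnew = rnew := by
    rcases hro with ⟨_, h2⟩ | ⟨_, h2⟩
    · rw [h2]; exact hRb.2.1
    · rw [h2]; exact hRa.2.1
  have hnene : rnew ≠ rold := by
    rcases hro with ⟨h1, h2⟩ | ⟨h1, h2⟩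
    · rw [h1, h2]; exact hrne
    · rw [h1, h2]; exact hrne.symm
  have hlt : rold < p.length := by
    rcases hro with ⟨h1, _⟩ | ⟨h1, _⟩
    · rw [h1, hpl]; exact PartOK_mem_lt hp ha hRa.1
    · rw [h1, hpl]; exact PartOK_mem_lt hp hb hRb.1
  have hG'len : ((G.set a (PySem.List.sorted (G.getD a [] ++ G.getD b []) (fun x => x) false)).eraseIdx b).length = G.length - 1 := by
    rw [List.length_eraseIdx, List.length_set, if_pos hb]
  have hrt'len : ((rt.set a rnew).eraseIdx b).length = G.length - 1 := by
    rw [List.length_eraseIdx, List.length_set, if_pos (by rw [hrtl]; exact hb), hrtl]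
  have hmgmem : ∀ i, i ∈ PySem.List.sorted (G.getD a [] ++ G.getD b []) (fun x => x) false ↔
      i ∈ G.getD a [] ∨ i ∈ G.getD b [] :=
    fun i => (hperm.mem_iff).trans List.mem_append
  have hmglen : (PySem.List.sorted (G.getD a [] ++ G.getD b []) (fun x => x) false).length
      = (G.getD a []).length + (G.getD b []).length := by
    rw [hperm.length_eq, List.length_append]
  refine ⟨by rw [List.length_set]; exact hpl, by rw [hG'len, hrt'len], ?_⟩
  intro gi hgi
  rw [hG'len] at hgi
  rw [set_erase_getD G _ hab hb [] gi (by rw [hG'len]; omega),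
    set_erase_getD rt rnew hab (by rw [hrtl]; exact hb) 0 gi (by rw [hrt'len]; omega)]
  by_cases hgb : gi < b
  · by_cases hga2 : gi = a
    · simp only [if_pos hgb, if_pos hga2]
      rcases hro with ⟨h1, h2⟩ | ⟨h1, h2⟩
      · subst h1; subst h2
        exact Rooted_merge hmgmem hmglen hRa hRb hlt hnene
      · subst h1; subst h2
        exact Rooted_merge (fun i => (hmgmem i).trans or_comm)
          (by rw [hmglen]; omega) hRb hRa hlt hnene
    · simp only [if_pos hgb, if_neg hga2]
      have hgilt : gi < G.length := by omega
      refine Rooted_keep hfold (hu.2.2 gi hgilt) ?_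
      rcases hro with ⟨h1, _⟩ | ⟨h1, _⟩
      · rw [h1]; exact UFOK_roots_ne hp hu hgilt ha hga2
      · rw [h1]; exact UFOK_roots_ne hp hu hgilt hb (by omega)
  · simp only [if_neg hgb]
    have hgi1 : gi + 1 < G.length := by omega
    refine Rooted_keep hfold (hu.2.2 (gi + 1) hgi1) ?_
    rcases hro with ⟨h1, _⟩ | ⟨h1, _⟩
    · rw [h1]; exact UFOK_roots_ne hp hu hgi1 ha (by omega)
    · rw [h1]; exact UFOK_roots_ne hp hu hgi1 hb (by omega)

theorem pvLink_fst (p rk : List Nat) (ru rv : Nat) :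
    (pvLink p rk ru rv).1 = p.set rv ru ∨ (pvLink p rk ru rv).1 = p.set ru rv := by
  unfold pvLink
  by_cases h : rk.getD ru 0 > rk.getD rv 0
  · left; rw [if_pos h]
  · right
    rw [if_neg h]
    by_cases h2 : rk.getD ru 0 = rk.getD rv 0
    · rw [if_pos h2]
    · rw [if_neg h2]

-- ---------- loop reduction equations ----------

theorem pvLoopA_cons (k : Int) (n : Nat) (e : Nat × Nat × Int) (rest : List (Nat × Nat × Int))
    (cl : Int) (p rk : List Nat) :
    pvLoopA k n (e :: rest) cl p rk =
      (if cl = k then (p, rk)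
      else
        let f1 := pvFind n p e.1
        let f2 := pvFind n f1.1 e.2.1
        if f1.2 ≠ f2.2 then
          let f3 := pvFind n f2.1 e.1
          let f4 := pvFind n f3.1 e.2.1
          let lk := pvLink f4.1 rk f3.2 f4.2
          pvLoopA k n rest (cl - 1) lk.1 lk.2
        else pvLoopA k n rest cl f2.1 rk) := rfl

theorem pvLoopB_succ (k : Int) (S : List (Nat × Nat × Int)) (n fuel : Nat) (G : List (List Nat)) :
    pvLoopB k S n (fuel + 1) G =
      (if (G.length : Int) = k then G
      else
        let lab := pvLab n G
        match S.find? (fun e => lab.getD e.1 0 ≠ lab.getD e.2.1 0) with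
        | none => G
        | some e =>
          let a0 := lab.getD e.1 0
          let b0 := lab.getD e.2.1 0
          let a := if a0 > b0 then b0 else a0
          let b := if a0 > b0 then a0 else b0
          if b < G.length then
            pvLoopB k S n fuel ((G.set a (PySem.List.sorted (G.getD a [] ++ G.getD b []) (fun x => x) false)).eraseIdx b)
          else G) := rfl

-- ---------- locating groups ----------

theorem PartOK_group_of {n : Nat} {G : List (List Nat)} (h : PartOK n G) {x : Nat}
    (hx : x < n) : ∃ gi, ∃ (hgi : gi < G.length), x ∈ G.getD gi [] := by
  have hmem : x ∈ G.flatten := h.1.mem_iff.mpr (List.mem_range.mpr hx)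
  obtain ⟨g, hgmem, hxg⟩ := List.mem_flatten.mp hmem
  obtain ⟨gi, hgi, hEq⟩ := List.mem_iff_getElem.mp hgmem
  exact ⟨gi, hgi, by rw [pvGetD_eq G gi [] hgi, hEq]; exact hxg⟩

theorem pvFind_run {n : Nat} {p rt : List Nat} {G : List (List Nat)}
    (hp : PartOK n G) (hu : UFOK n p G rt) {x gi : Nat} (hgi : gi < G.length)
    (hx : x ∈ G.getD gi []) :
    (pvFind n p x).2 = rt.getD gi 0 ∧ UFOK n (pvFind n p x).1 G rt := by
  obtain ⟨hm, hfx, hc⟩ := hu.2.2 gi hgi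
  obtain ⟨m, hbnd, hch⟩ := hc x hx
  have hmn : m < n := by
    have := PartOK_size hp hgi
    omega
  obtain ⟨h1, h2⟩ := pvFind_spec n p x (rt.getD gi 0) m hmn hch hfx
  exact ⟨h1, UFOK_imp h2 hu⟩

-- ---------- how a merge moves groups ----------

theorem merge_group_embed {n : Nat} {G : List (List Nat)} (h : PartOK n G) {a b : Nat}
    (hab : a < b) (hb : b < G.length) {g0 : Nat} (hg0 : g0 < G.length) :
    ∃ gi', ∃ (h' : gi' < ((G.set a (PySem.List.sorted (G.getD a [] ++ G.getD b []) (fun x => x) false)).eraseIdx b).length),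
      ∀ z ∈ G.getD g0 [], z ∈ ((G.set a (PySem.List.sorted (G.getD a [] ++ G.getD b []) (fun x => x) false)).eraseIdx b).getD gi' [] := by
  have hperm := PySem.List.sorted_perm (G.getD a [] ++ G.getD b []) (fun x : Nat => x) false
  have hlen : ((G.set a (PySem.List.sorted (G.getD a [] ++ G.getD b []) (fun x => x) false)).eraseIdx b).length = G.length - 1 := by
    rw [List.length_eraseIdx, List.length_set, if_pos hb]
  by_cases hgab : g0 = a ∨ g0 = b
  · refine ⟨a, by omega, fun z hz => ?_⟩
    rw [set_erase_getD G _ hab hb [] a (by omega), if_pos hab, if_pos rfl]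
    refine hperm.mem_iff.mpr (List.mem_append.mpr ?_)
    rcases hgab with rfl | rfl
    · exact Or.inl hz
    · exact Or.inr hz
  · push_neg at hgab
    by_cases hlt : g0 < b
    · refine ⟨g0, by omega, fun z hz => ?_⟩
      rw [set_erase_getD G _ hab hb [] g0 (by omega), if_pos hlt, if_neg hgab.1]
      exact hz
    · refine ⟨g0 - 1, by omega, fun z hz => ?_⟩
      rw [set_erase_getD G _ hab hb [] (g0 - 1) (by omega), if_neg (by omega),
        show g0 - 1 + 1 = g0 from by omega]
      exact hz

-- ---------- one merge step preserves both invariants ----------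

theorem merge_step {n : Nat} {G : List (List Nat)} {rt p4 rk : List Nat}
    (hpart : PartOK n G) (hu4 : UFOK n p4 G rt)
    {gi gj : Nat} (hgi : gi < G.length) (hgj : gj < G.length) (hne : gi ≠ gj) :
    PartOK n ((G.set (min gi gj) (PySem.List.sorted (G.getD (min gi gj) [] ++ G.getD (max gi gj) []) (fun x => x) false)).eraseIdx (max gi gj)) ∧
    ∃ rt', UFOK n (pvLink p4 rk (rt.getD gi 0) (rt.getD gj 0)).1
      ((G.set (min gi gj) (PySem.List.sorted (G.getD (min gi gj) [] ++ G.getD (max gi gj) []) (fun x => x) false)).eraseIdx (max gi gj)) rt' := by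
  have hab : min gi gj < max gi gj := by omega
  have hbm : max gi gj < G.length := by omega
  refine ⟨merge_PartOK hpart hab hbm, ?_⟩
  rcases pvLink_fst p4 rk (rt.getD gi 0) (rt.getD gj 0) with h5 | h5 <;> rw [h5]
  · -- parent[rt gj] := rt gi
    rcases Nat.lt_or_ge gi gj with hlt | hge
    · have hmin : min gi gj = gi := by omega
      have hmax : max gi gj = gj := by omega
      exact ⟨_, merge_UFOK hpart hu4 hab hbm (Or.inr ⟨by rw [hmax], by rw [hmin]⟩)⟩
    · have hmin : min gi gj = gj := by omega
      have hmax : max gi gj = gi := by omega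
      exact ⟨_, merge_UFOK hpart hu4 hab hbm (Or.inl ⟨by rw [hmin], by rw [hmax]⟩)⟩
  · -- parent[rt gi] := rt gj
    rcases Nat.lt_or_ge gi gj with hlt | hge
    · have hmin : min gi gj = gi := by omega
      have hmax : max gi gj = gj := by omega
      exact ⟨_, merge_UFOK hpart hu4 hab hbm (Or.inl ⟨by rw [hmin], by rw [hmax]⟩)⟩
    · have hmin : min gi gj = gj := by omega
      have hmax : max gi gj = gi := by omega
      exact ⟨_, merge_UFOK hpart hu4 hab hbm (Or.inr ⟨by rw [hmax], by rw [hmin]⟩)⟩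

-- ---------- the bisimulation of the two loops ----------

theorem pvSim (k : Int) (n : Nat) (S : List (Nat × Nat × Int))
    (hS : ∀ e ∈ S, e.1 < n ∧ e.2.1 < n) :
    ∀ (S' C : List (Nat × Nat × Int)) (G : List (List Nat)) (rt p rk : List Nat) (fuel : Nat),
      S = C ++ S' →
      (∀ e ∈ C, (pvLab n G).getD e.1 0 = (pvLab n G).getD e.2.1 0) →
      PartOK n G → UFOK n p G rt → G.length < fuel →
      PartOK n (pvLoopB k S n fuel G) ∧
      ∃ rt', UFOK n (pvLoopA k n S' ((G.length : Nat) : Int) p rk).1 (pvLoopB k S n fuel G) rt' := by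
  intro S'
  induction S' with
  | nil =>
    intro C G rt p rk fuel hSC hC hpart huf hfuel
    obtain ⟨f, rfl⟩ : ∃ f, fuel = f + 1 := ⟨fuel - 1, by omega⟩
    have hBred : pvLoopB k S n (f + 1) G = G := by
      rw [pvLoopB_succ]
      by_cases hk : (G.length : Int) = k
      · rw [if_pos hk]
      · rw [if_neg hk]
        have hfind : S.find? (fun e => ((pvLab n G).getD e.1 0 ≠ (pvLab n G).getD e.2.1 0 : Bool)) = none := by
          refine List.find?_eq_none.mpr (fun x hx => ?_)
          have hxx := hC x (by rwa [hSC, List.append_nil] at hx)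
          simp only [ne_eq, decide_eq_true_eq, not_not]
          exact hxx
        simp only [hfind]
    rw [hBred]
    exact ⟨hpart, rt, huf⟩
  | cons e rest IH =>
    intro C G rt p rk fuel hSC hC hpart huf hfuel
    obtain ⟨f, rfl⟩ : ∃ f, fuel = f + 1 := ⟨fuel - 1, by omega⟩
    by_cases hk : ((G.length : Nat) : Int) = k
    · have hBred : pvLoopB k S n (f + 1) G = G := by rw [pvLoopB_succ, if_pos hk]
      have hAred : pvLoopA k n (e :: rest) ((G.length : Nat) : Int) p rk = (p, rk) := by
        rw [pvLoopA_cons, if_pos hk]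
      rw [hBred, hAred]
      exact ⟨hpart, rt, huf⟩
    · have hem : e ∈ S := by rw [hSC]; exact List.mem_append_right _ List.mem_cons_self
      obtain ⟨hx1, hx2⟩ := hS e hem
      obtain ⟨gi, hgi, hmi⟩ := PartOK_group_of hpart hx1
      obtain ⟨gj, hgj, hmj⟩ := PartOK_group_of hpart hx2
      obtain ⟨hf1, hu1⟩ := pvFind_run (p := p) hpart huf hgi hmi
      obtain ⟨hf2, hu2⟩ := pvFind_run (p := (pvFind n p e.1).1) hpart hu1 hgj hmj
      have hlabi := pvLab_spec hpart hgi hmi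
      have hlabj := pvLab_spec hpart hgj hmj
      by_cases heq : rt.getD gi 0 = rt.getD gj 0
      · -- the edge joins one cluster with itself: A skips it, B never selects it
        have hgij : gi = gj := by
          by_contra hne
          exact UFOK_roots_ne hpart huf hgi hgj hne heq
        have hlab : (pvLab n G).getD e.1 0 = (pvLab n G).getD e.2.1 0 := by
          rw [hlabi, hlabj, hgij]
        have hroots : (pvFind n p e.1).2 = (pvFind n (pvFind n p e.1).1 e.2.1).2 := by
          rw [hf1, hf2, hgij]
        have hAred : pvLoopA k n (e :: rest) ((G.length : Nat) : Int) p rk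
            = pvLoopA k n rest ((G.length : Nat) : Int) (pvFind n (pvFind n p e.1).1 e.2.1).1 rk := by
          rw [pvLoopA_cons, if_neg hk]
          simp only [hroots, ne_eq, not_true_eq_false, if_false]
        rw [hAred]
        refine IH (C ++ [e]) G rt _ rk (f + 1) (by rw [hSC, List.append_assoc]; rfl) ?_ hpart hu2 hfuel
        intro e' he'
        rcases List.mem_append.mp he' with h | h
        · exact hC e' h
        · rw [List.mem_singleton.mp h]
          exact hlab
      · -- the edge crosses two clusters: both sides merge them
        have hgij : gi ≠ gj := fun hh => heq (by rw [hh])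
        obtain ⟨hf3, hu3⟩ := pvFind_run hpart hu2 hgi hmi
        obtain ⟨hf4, hu4⟩ := pvFind_run hpart hu3 hgj hmj
        have hroots : (pvFind n p e.1).2 ≠ (pvFind n (pvFind n p e.1).1 e.2.1).2 := by
          rw [hf1, hf2]; exact heq
        have hAred : pvLoopA k n (e :: rest) ((G.length : Nat) : Int) p rk
            = pvLoopA k n rest (((G.length : Nat) : Int) - 1)
                (pvLink (pvFind n (pvFind n (pvFind n (pvFind n p e.1).1 e.2.1).1 e.1).1 e.2.1).1 rk
                  (pvFind n (pvFind n (pvFind n p e.1).1 e.2.1).1 e.1).2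
                  (pvFind n (pvFind n (pvFind n (pvFind n p e.1).1 e.2.1).1 e.1).1 e.2.1).2).1
                (pvLink (pvFind n (pvFind n (pvFind n (pvFind n p e.1).1 e.2.1).1 e.1).1 e.2.1).1 rk
                  (pvFind n (pvFind n (pvFind n p e.1).1 e.2.1).1 e.1).2
                  (pvFind n (pvFind n (pvFind n (pvFind n p e.1).1 e.2.1).1 e.1).1 e.2.1).2).2 := by
          rw [pvLoopA_cons, if_neg hk]
          simp only [hroots, ne_eq, not_false_eq_true, if_true]
        have hfind : S.find? (fun e' => ((pvLab n G).getD e'.1 0 ≠ (pvLab n G).getD e'.2.1 0 : Bool)) = some e := by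
          rw [hSC, List.find?_append]
          have h0 : C.find? (fun e' => ((pvLab n G).getD e'.1 0 ≠ (pvLab n G).getD e'.2.1 0 : Bool)) = none := by
            refine List.find?_eq_none.mpr (fun x hx => ?_)
            simp only [ne_eq, decide_eq_true_eq, not_not]
            exact hC x hx
          rw [h0, Option.none_or]
          exact List.find?_cons_of_pos
            (by simp only [ne_eq, decide_eq_true_eq, hlabi, hlabj]; exact hgij)
        have hifa : (if (pvLab n G).getD e.1 0 > (pvLab n G).getD e.2.1 0
            then (pvLab n G).getD e.2.1 0 else (pvLab n G).getD e.1 0) = min gi gj := by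
          rw [hlabi, hlabj]
          by_cases hgt : gi > gj
          · rw [if_pos hgt]; omega
          · rw [if_neg hgt]; omega
        have hifb : (if (pvLab n G).getD e.1 0 > (pvLab n G).getD e.2.1 0
            then (pvLab n G).getD e.1 0 else (pvLab n G).getD e.2.1 0) = max gi gj := by
          rw [hlabi, hlabj]
          by_cases hgt : gi > gj
          · rw [if_pos hgt]; omega
          · rw [if_neg hgt]; omega
        have hbm : max gi gj < G.length := by omega
        have hBred : pvLoopB k S n (f + 1) G = pvLoopB k S n f
            ((G.set (min gi gj) (PySem.List.sorted (G.getD (min gi gj) [] ++ G.getD (max gi gj) []) (fun x => x) false)).eraseIdx (max gi gj)) := by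
          rw [pvLoopB_succ, if_neg hk]
          simp only [hfind, hifa, hifb]
          rw [if_pos hbm]
        rw [hf3, hf4] at hAred
        obtain ⟨hpart', rt', hu5⟩ := merge_step (rk := rk) hpart hu4 hgi hgj hgij
        have hlen' : ((G.set (min gi gj) (PySem.List.sorted (G.getD (min gi gj) [] ++ G.getD (max gi gj) []) (fun x => x) false)).eraseIdx (max gi gj)).length = G.length - 1 := by
          rw [List.length_eraseIdx, List.length_set, if_pos hbm]
        have hcl : ((G.length : Nat) : Int) - 1 =
            ((((G.set (min gi gj) (PySem.List.sorted (G.getD (min gi gj) [] ++ G.getD (max gi gj) []) (fun x => x) false)).eraseIdx (max gi gj)).length : Nat) : Int) := by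
          rw [hlen']
          omega
        rw [hAred, hBred, hcl]
        refine IH (C ++ [e]) _ rt' _ _ f (by rw [hSC, List.append_assoc]; rfl) ?_ hpart' hu5 (by omega)
        -- every already-skipped edge still joins a cluster with itself
        intro e' he'
        have hab : min gi gj < max gi gj := by omega
        rcases List.mem_append.mp he' with h | h
        · have he'S : e' ∈ S := by rw [hSC]; exact List.mem_append_left _ h
          obtain ⟨hy1, hy2⟩ := hS e' he'S
          obtain ⟨g1, hg1, hm1⟩ := PartOK_group_of hpart hy1
          obtain ⟨g2, hg2, hm2⟩ := PartOK_group_of hpart hy2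
          have hg12 : g1 = g2 := by
            have := hC e' h
            rw [pvLab_spec hpart hg1 hm1, pvLab_spec hpart hg2 hm2] at this
            exact this
          subst hg12
          obtain ⟨gi', hgi', hembed⟩ := merge_group_embed hpart hab hbm hg1
          rw [pvLab_spec hpart' hgi' (hembed _ hm1), pvLab_spec hpart' hgi' (hembed _ hm2)]
        · rw [List.mem_singleton.mp h]
          obtain ⟨ga', hga', hembeda⟩ := merge_group_embed hpart hab hbm hgi
          obtain ⟨gb', hgb', hembedb⟩ := merge_group_embed hpart hab hbm hgj
          -- both endpoint groups land in the merged group at index  min gi gj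
          have hmema : e.1 ∈ ((G.set (min gi gj) (PySem.List.sorted (G.getD (min gi gj) [] ++ G.getD (max gi gj) []) (fun x => x) false)).eraseIdx (max gi gj)).getD (min gi gj) [] := by
            rw [set_erase_getD G _ hab hbm [] (min gi gj) (by rw [hlen']; omega), if_pos hab, if_pos rfl]
            refine (PySem.List.sorted_perm _ _ _).mem_iff.mpr (List.mem_append.mpr ?_)
            rcases Nat.lt_or_ge gi gj with hlt | hge
            · exact Or.inl (by rw [show min gi gj = gi from by omega]; exact hmi)
            · exact Or.inr (by rw [show max gi gj = gi from by omega]; exact hmi)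
          have hmemb : e.2.1 ∈ ((G.set (min gi gj) (PySem.List.sorted (G.getD (min gi gj) [] ++ G.getD (max gi gj) []) (fun x => x) false)).eraseIdx (max gi gj)).getD (min gi gj) [] := by
            rw [set_erase_getD G _ hab hbm [] (min gi gj) (by rw [hlen']; omega), if_pos hab, if_pos rfl]
            refine (PySem.List.sorted_perm _ _ _).mem_iff.mpr (List.mem_append.mpr ?_)
            rcases Nat.lt_or_ge gi gj with hlt | hge
            · exact Or.inr (by rw [show max gi gj = gj from by omega]; exact hmj)
            · exact Or.inl (by rw [show min gi gj = gj from by omega]; exact hmj)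
          rw [pvLab_spec hpart' (by rw [hlen']; omega) hmema,
            pvLab_spec hpart' (by rw [hlen']; omega) hmemb]

-- ---------- dictionary primitives used by the collection loop ----------

theorem dict_contains_iff (d : PySem.Dict Nat (List Nat)) (k : Nat) :
    d.contains k = true ↔ ∃ q ∈ d.items, q.1 = k := by
  simp [PySem.Dict.contains, List.any_eq_true, beq_iff_eq]

theorem dict_insert_fresh (d : PySem.Dict Nat (List Nat)) (k : Nat) (v : List Nat)
    (h : d.contains k = false) : (d.insert k v).items = d.items ++ [(k, v)] := by
  simp [PySem.Dict.insert, h]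

theorem dict_getD_fresh (d : PySem.Dict Nat (List Nat)) (k : Nat) (dflt : List Nat)
    (h : d.contains k = false) : d.getD k dflt = dflt := by
  have hfind : d.items.find? (fun p => p.1 == k) = none := by
    refine List.find?_eq_none.mpr (fun q hq => ?_)
    have := List.any_eq_false.mp h q hq
    simpa using this
  simp [PySem.Dict.getD, PySem.Dict.get?, hfind]

theorem dict_insert_found (d : PySem.Dict Nat (List Nat)) (k : Nat) (v : List Nat)
    (w : List Nat) (I1 I2 : List (Nat × List Nat)) (hitems : d.items = I1 ++ (k, w) :: I2)
    (h1 : ∀ q ∈ I1, q.1 ≠ k) (h2 : ∀ q ∈ I2, q.1 ≠ k) :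
    (d.insert k v).items = I1 ++ (k, v) :: I2 ∧ ∀ dflt, d.getD k dflt = w := by
  have hcont : d.contains k = true := (dict_contains_iff d k).mpr
    ⟨(k, w), by rw [hitems]; exact List.mem_append_right _ List.mem_cons_self, rfl⟩
  constructor
  · simp only [PySem.Dict.insert, hcont, if_true, hitems]
    rw [List.map_append, List.map_cons]
    have hI1 : I1.map (fun p => if p.1 == k then (k, v) else p) = I1 := by
      rw [List.map_congr_left (g := id) (fun q hq => by simp [h1 q hq]), List.map_id]
    have hI2 : I2.map (fun p => if p.1 == k then (k, v) else p) = I2 := by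
      rw [List.map_congr_left (g := id) (fun q hq => by simp [h2 q hq]), List.map_id]
    rw [hI1, hI2]
    simp
  · intro dflt
    have h1' : I1.find? (fun p => p.1 == k) = none :=
      List.find?_eq_none.mpr (fun q hq => by simp [h1 q hq])
    simp [PySem.Dict.getD, PySem.Dict.get?, hitems, List.find?_append, h1']

-- ---------- counting heads below a bound ----------

def pvCnt (G : List (List Nat)) (m : Nat) : Nat :=
  (G.map (fun g => g.headD 0)).countP (fun h => decide (h < m))

theorem countP_lt_self : ∀ (l : List Nat), l.Pairwise (· < ·) → ∀ (t : Nat), t < l.length →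
    ∀ (v : Nat), (∀ (ht : t < l.length), l[t] = v) →
    l.countP (fun x => decide (x < v)) = t := by
  intro l
  induction l with
  | nil => intro _ t ht; simp at ht
  | cons a tl IH =>
    intro hpw t ht v hv
    obtain ⟨hhead, htail⟩ := List.pairwise_cons.mp hpw
    cases t with
    | zero =>
      have hav : a = v := by simpa using hv ht
      subst hav
      rw [List.countP_cons]
      have h1 : tl.countP (fun x => decide (x < a)) = 0 := by
        refine List.countP_eq_zero.mpr (fun x hx => ?_)
        have := hhead x hx
        simp
        omega
      rw [h1]
      simp
    | succ t' =>
      have hlt : t' < tl.length := by simpa using ht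
      have hv' : ∀ (h : t' < tl.length), tl[t'] = v := fun _ => by simpa using hv ht
      have hx : a < v := by rw [← hv' hlt]; exact hhead _ (List.getElem_mem hlt)
      rw [List.countP_cons, IH htail t' hlt v hv', if_pos (by simpa using hx)]

theorem countP_lt_succ_self : ∀ (l : List Nat), l.Pairwise (· < ·) → ∀ (t : Nat), t < l.length →
    ∀ (v : Nat), (∀ (ht : t < l.length), l[t] = v) →
    l.countP (fun x => decide (x < v + 1)) = t + 1 := by
  intro l
  induction l with
  | nil => intro _ t ht; simp at ht
  | cons a tl IH =>
    intro hpw t ht v hv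
    obtain ⟨hhead, htail⟩ := List.pairwise_cons.mp hpw
    cases t with
    | zero =>
      have hav : a = v := by simpa using hv ht
      subst hav
      rw [List.countP_cons]
      have h1 : tl.countP (fun x => decide (x < a + 1)) = 0 := by
        refine List.countP_eq_zero.mpr (fun x hx => ?_)
        have := hhead x hx
        simp
        omega
      rw [h1]
      simp
    | succ t' =>
      have hlt : t' < tl.length := by simpa using ht
      have hv' : ∀ (h : t' < tl.length), tl[t'] = v := fun _ => by simpa using hv ht
      have hx : a < v := by rw [← hv' hlt]; exact hhead _ (List.getElem_mem hlt)
      rw [List.countP_cons, IH htail t' hlt v hv', if_pos (by simp; omega)]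

-- ---------- the cluster-collection loop of A rebuilds exactly B's groups ----------

theorem collect_items {n : Nat} {G : List (List Nat)} {rt : List Nat} (hp : PartOK n G)
    (hrtlen : rt.length = G.length)
    (hrne : ∀ gi gj, gi < G.length → gj < G.length → gi ≠ gj → rt.getD gi 0 ≠ rt.getD gj 0) :
    ∀ (m : Nat), m ≤ n → ∀ (p : List Nat), UFOK n p G rt →
      UFOK n ((List.range m).foldl (fun st i =>
        ((pvFind n st.1 i).1, st.2.insert (pvFind n st.1 i).2 (st.2.getD (pvFind n st.1 i).2 [] ++ [i])))
        (p, (PySem.Dict.empty : PySem.Dict Nat (List Nat)))).1 G rt ∧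
      ((List.range m).foldl (fun st i =>
        ((pvFind n st.1 i).1, st.2.insert (pvFind n st.1 i).2 (st.2.getD (pvFind n st.1 i).2 [] ++ [i])))
        (p, (PySem.Dict.empty : PySem.Dict Nat (List Nat)))).2.items =
      ((G.zip rt).take (pvCnt G m)).map (fun gr => (gr.2, gr.1.filter (fun x => decide (x < m)))) := by
  intro m
  induction m with
  | zero =>
    intro _ p hu
    refine ⟨hu, ?_⟩
    have h0 : pvCnt G 0 = 0 := by
      unfold pvCnt
      exact List.countP_eq_zero.mpr (fun x _ => by simp)
    rw [h0]
    simp [PySem.Dict.empty]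
  | succ m IH =>
    intro hm p hu
    obtain ⟨hufm, hitems⟩ := IH (by omega) p hu
    rw [List.range_succ, List.foldl_append, List.foldl_cons, List.foldl_nil]
    have hmn : m < n := by omega
    obtain ⟨gim, hgim, hmm⟩ := PartOK_group_of hp hmn
    obtain ⟨hfr, huf'⟩ := pvFind_run hp hufm hgim hmm
    refine ⟨huf', ?_⟩
    rw [hfr]
    have hgmem : G.getD gim [] ∈ G := by
      rw [pvGetD_eq G gim [] hgim]; exact List.getElem_mem hgim
    have hgnil : G.getD gim [] ≠ [] := (hp.2.1 _ hgmem).1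
    have hpwg : (G.getD gim []).Pairwise (· < ·) := (hp.2.1 _ hgmem).2
    have hhead_le : (G.getD gim []).headD 0 ≤ m := head_min hpwg hmm
    have hHLlen : gim < (G.map (fun g => g.headD 0)).length := by
      rw [List.length_map]; exact hgim
    have hHLgim : (G.map (fun g => g.headD 0))[gim]'hHLlen = (G.getD gim []).headD 0 := by
      rw [List.getElem_map, pvGetD_eq G gim [] hgim]
    have hZlen : (G.zip rt).length = G.length := by
      rw [List.length_zip, hrtlen]; omega
    have hclen : pvCnt G m ≤ G.length := by
      have := List.countP_le_length (l := G.map (fun g => g.headD 0)) (p := fun h => decide (h < m))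
      rw [List.length_map] at this
      exact this
    -- membership of a dict item produced from the  take  prefix
    have hmemitem : ∀ q ∈ ((G.zip rt).take (pvCnt G m)).map
        (fun gr => (gr.2, gr.1.filter (fun x => decide (x < m)))),
        ∃ j, ∃ (hj : j < G.length), j < pvCnt G m ∧
          q = (rt.getD j 0, (G.getD j []).filter (fun x => decide (x < m))) := by
      intro q hq
      obtain ⟨gr, hgr, rfl⟩ := List.mem_map.mp hq
      obtain ⟨j, hj, hgrj⟩ := List.mem_iff_getElem.mp hgr
      have hjlt : j < pvCnt G m := by
        have := hj
        rw [List.length_take] at this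
        omega
      have hjG : j < G.length := by
        have := hj
        rw [List.length_take, hZlen] at this
        omega
      refine ⟨j, hjG, hjlt, ?_⟩
      rw [← hgrj, List.getElem_take, List.getElem_zip]
      rw [pvGetD_eq G j [] hjG, pvGetD_eq rt j 0 (by rw [hrtlen]; exact hjG)]
    by_cases hfresh : (G.getD gim []).headD 0 = m
    · -- first node of its cluster: a fresh key is appended
      have hcm : pvCnt G m = gim := by
        unfold pvCnt
        exact countP_lt_self _ hp.2.2 gim hHLlen m (fun _ => by rw [hHLgim, hfresh])
      have hcm1 : pvCnt G (m + 1) = gim + 1 := by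
        unfold pvCnt
        exact countP_lt_succ_self _ hp.2.2 gim hHLlen m (fun _ => by rw [hHLgim, hfresh])
      have hkeys : ∀ q ∈ ((List.range m).foldl (fun st i =>
          ((pvFind n st.1 i).1, st.2.insert (pvFind n st.1 i).2 (st.2.getD (pvFind n st.1 i).2 [] ++ [i])))
          (p, (PySem.Dict.empty : PySem.Dict Nat (List Nat)))).2.items, q.1 ≠ rt.getD gim 0 := by
        intro q hq
        rw [hitems] at hq
        obtain ⟨j, hjG, hjlt, rfl⟩ := hmemitem q hq
        exact hrne j gim hjG hgim (by omega)
      have hcont : ((List.range m).foldl (fun st i =>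
          ((pvFind n st.1 i).1, st.2.insert (pvFind n st.1 i).2 (st.2.getD (pvFind n st.1 i).2 [] ++ [i])))
          (p, (PySem.Dict.empty : PySem.Dict Nat (List Nat)))).2.contains (rt.getD gim 0) = false := by
        rw [Bool.eq_false_iff]
        intro hba
        obtain ⟨q, hq, hq1⟩ := (dict_contains_iff _ _).mp hba
        exact hkeys q hq hq1
      rw [dict_insert_fresh _ _ _ hcont, dict_getD_fresh _ _ _ hcont, hitems, hcm, hcm1,
        List.take_succ, List.getElem?_eq_getElem (by rw [hZlen]; exact hgim), List.map_append]
      congr 1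
      · refine List.map_congr_left (fun gr hgr => ?_)
        obtain ⟨j, hj, hgrj⟩ := List.mem_iff_getElem.mp hgr
        have hjlt : j < gim := by
          have := hj; rw [List.length_take] at this; omega
        have hjG : j < G.length := by omega
        have hgr1 : gr.1 = G[j] := by
          rw [← hgrj, List.getElem_take, List.getElem_zip]
        congr 1
        refine List.filter_congr (fun x hx => ?_)
        have hxm : x ≠ m := by
          intro rfl
          refine PartOK_disj hp hjG hgim (by omega) ?_ hmm
          rw [pvGetD_eq G j [] hjG, ← hgr1]
          exact hx
        rw [decide_eq_decide]
        omega
      · simp only [Option.toList_some, List.map_cons, List.map_nil, List.getElem_zip]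
        cases hgd : G.getD gim [] with
        | nil => exact absurd hgd hgnil
        | cons hdg tlg =>
          have hhd : hdg = m := by
            have := hfresh; rw [hgd] at this; simpa using this
          subst hhd
          have htlg : ∀ x ∈ tlg, hdg < x := (List.pairwise_cons.mp (hgd ▸ hpwg)).1
          have hGgim : G[gim] = hdg :: tlg := by rw [← pvGetD_eq G gim [] hgim]; exact hgd
          have hrtgim : rt[gim]'(by rw [hrtlen]; exact hgim) = rt.getD gim 0 := by
            rw [pvGetD_eq rt gim 0 (by rw [hrtlen]; exact hgim)]
          rw [hGgim, hrtgim]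
          have hfil : (hdg :: tlg).filter (fun x => decide (x < hdg + 1)) = [hdg] := by
            rw [List.filter_cons]
            simp only [decide_eq_true_eq]
            rw [if_pos (by omega)]
            have : tlg.filter (fun x => decide (x < hdg + 1)) = [] := by
              refine List.filter_eq_nil_iff.mpr (fun x hx => ?_)
              have := htlg x hx
              simp
              omega
            rw [this]
          rw [hfil]
          simp
    · -- its cluster already has a key: the node is appended to that entry
      have hlt : (G.getD gim []).headD 0 < m := by omega
      have hcnt1 : pvCnt G (m + 1) = pvCnt G m := by
        unfold pvCnt
        refine List.countP_congr (fun h hmem => ?_)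
        obtain ⟨g, hg2, rfl⟩ := List.mem_map.mp hmem
        have hhm : g.headD 0 ≠ m := by
          intro he
          have hgnil2 : g ≠ [] := (hp.2.1 g hg2).1
          have hmem2 : m ∈ g := he ▸ head_mem hgnil2
          obtain ⟨j, hj, hEq⟩ := List.mem_iff_getElem.mp hg2
          have hmj : m ∈ G.getD j [] := by rw [pvGetD_eq G j [] hj, hEq]; exact hmem2
          have hj_eq : j = gim := by
            by_contra hne2
            exact PartOK_disj hp hj hgim hne2 hmj hmm
          subst hj_eq
          rw [pvGetD_eq G j [] hj] at hlt hfresh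
          rw [hEq] at hlt
          omega
        simp only [decide_eq_true_eq]
        omega
      have hgim_lt_c : gim < pvCnt G m := by
        have h1 := countP_lt_succ_self _ hp.2.2 gim hHLlen ((G.getD gim []).headD 0)
          (fun _ => hHLgim)
        have h2 : (G.map (fun g => g.headD 0)).countP
              (fun x => decide (x < (G.getD gim []).headD 0 + 1))
            ≤ (G.map (fun g => g.headD 0)).countP (fun h => decide (h < m)) := by
          refine List.countP_mono_left (fun x _ hx => ?_)
          simp only [decide_eq_true_eq] at hx ⊢
          omega
        unfold pvCnt
        omega
      -- decompose the current items at position  gim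
      have hTlen : ((G.zip rt).take (pvCnt G m)).length = pvCnt G m := by
        rw [List.length_take]; omega
      have hgimT : gim < ((G.zip rt).take (pvCnt G m)).length := by omega
      have hdec0 : (G.zip rt).take (pvCnt G m) =
          ((G.zip rt).take (pvCnt G m)).take gim ++
            ((G.zip rt).take (pvCnt G m))[gim] :: ((G.zip rt).take (pvCnt G m)).drop (gim + 1) := by
        conv_lhs => rw [← List.take_append_drop gim ((G.zip rt).take (pvCnt G m))]
        rw [List.drop_eq_getElem_cons hgimT]
      have hTgim : ((G.zip rt).take (pvCnt G m))[gim]'hgimT = (G[gim], rt[gim]'(by rw [hrtlen]; exact hgim)) := by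
        rw [List.getElem_take, List.getElem_zip]
      have hitems' : ((List.range m).foldl (fun st i =>
            ((pvFind n st.1 i).1, st.2.insert (pvFind n st.1 i).2 (st.2.getD (pvFind n st.1 i).2 [] ++ [i])))
            (p, (PySem.Dict.empty : PySem.Dict Nat (List Nat)))).2.items =
          (((G.zip rt).take (pvCnt G m)).take gim).map (fun gr => (gr.2, gr.1.filter (fun x => decide (x < m))))
            ++ (rt.getD gim 0, (G.getD gim []).filter (fun x => decide (x < m)))
              :: (((G.zip rt).take (pvCnt G m)).drop (gim + 1)).map (fun gr => (gr.2, gr.1.filter (fun x => decide (x < m)))) := by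
        rw [hitems]
        conv_lhs => rw [congrArg (List.map (fun gr => (gr.2, gr.1.filter (fun x => decide (x < m))))) hdec0]
        rw [List.map_append, List.map_cons, hTgim]
        rw [pvGetD_eq G gim [] hgim, pvGetD_eq rt gim 0 (by rw [hrtlen]; exact hgim)]
      have hkey1 : ∀ q ∈ (((G.zip rt).take (pvCnt G m)).take gim).map
          (fun gr => (gr.2, gr.1.filter (fun x => decide (x < m)))), q.1 ≠ rt.getD gim 0 := by
        intro q hq
        obtain ⟨gr, hgr, rfl⟩ := List.mem_map.mp hq
        obtain ⟨j, hj, hgrj⟩ := List.mem_iff_getElem.mp hgr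
        have hjlt : j < gim := by
          have := hj; rw [List.length_take, hTlen] at this; omega
        have hgr2 : gr.2 = rt.getD j 0 := by
          rw [← hgrj, List.getElem_take, List.getElem_take, List.getElem_zip]
          rw [pvGetD_eq rt j 0 (by rw [hrtlen]; omega)]
        rw [hgr2]
        exact hrne j gim (by omega) hgim (by omega)
      have hkey2 : ∀ q ∈ (((G.zip rt).take (pvCnt G m)).drop (gim + 1)).map
          (fun gr => (gr.2, gr.1.filter (fun x => decide (x < m)))), q.1 ≠ rt.getD gim 0 := by
        intro q hq
        obtain ⟨gr, hgr, rfl⟩ := List.mem_map.mp hq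
        obtain ⟨j, hj, hgrj⟩ := List.mem_iff_getElem.mp hgr
        have hjlen : gim + 1 + j < pvCnt G m := by
          have := hj; rw [List.length_drop, hTlen] at this; omega
        have hgr2 : gr.2 = rt.getD (gim + 1 + j) 0 := by
          rw [← hgrj, List.getElem_drop, List.getElem_take, List.getElem_zip]
          rw [pvGetD_eq rt (gim + 1 + j) 0 (by rw [hrtlen]; omega)]
        rw [hgr2]
        exact hrne (gim + 1 + j) gim (by omega) hgim (by omega)
      obtain ⟨hins, hgetD⟩ := dict_insert_found _ (rt.getD gim 0)
        ((G.getD gim []).filter (fun x => decide (x < m)) ++ [m]) _ _ _ hitems' hkey1 hkey2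
      rw [hgetD, hins, hcnt1]
      -- the target list, decomposed at the same position
      conv_rhs => rw [congrArg (List.map (fun gr => (gr.2, gr.1.filter (fun x => decide (x < m + 1))))) hdec0]
      rw [List.map_append, List.map_cons, hTgim,
        pvGetD_eq G gim [] hgim, pvGetD_eq rt gim 0 (by rw [hrtlen]; exact hgim)]
      congr 1
      · refine (List.map_congr_left (fun gr hgr => ?_)).symm
        obtain ⟨j, hj, hgrj⟩ := List.mem_iff_getElem.mp hgr
        have hjlt : j < gim := by
          have := hj; rw [List.length_take, hTlen] at this; omega
        have hgr1 : gr.1 = G[j] := by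
          rw [← hgrj, List.getElem_take, List.getElem_take, List.getElem_zip]
        congr 1
        refine List.filter_congr (fun x hx => ?_)
        have hxm : x ≠ m := by
          intro rfl
          refine PartOK_disj hp (by omega : j < G.length) hgim (by omega) ?_ hmm
          rw [pvGetD_eq G j [] (by omega), ← hgr1]
          exact hx
        rw [decide_eq_decide]
        omega
      · congr 1
        · -- the updated entry
          congr 1
          dsimp only
          rw [← pvGetD_eq G gim [] hgim]
          obtain ⟨g1, g2, hgsplit⟩ := List.append_of_mem hmm
          have hpw2 : (g1 ++ m :: g2).Pairwise (· < ·) := by rw [← hgsplit]; exact hpwg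
          obtain ⟨hpw3, hpw4, hpw5⟩ := List.pairwise_append.mp hpw2
          have hg1 : ∀ x ∈ g1, x < m := fun x hx => hpw5 x hx m List.mem_cons_self
          have hg2 : ∀ x ∈ g2, m < x := (List.pairwise_cons.mp hpw4).1
          have e1' : g1.filter (fun x => decide (x < m + 1)) = g1 :=
            List.filter_eq_self.mpr (fun x hx => by have := hg1 x hx; simp; omega)
          have e2' : g1.filter (fun x => decide (x < m)) = g1 :=
            List.filter_eq_self.mpr (fun x hx => by have := hg1 x hx; simp; omega)
          have e3' : g2.filter (fun x => decide (x < m + 1)) = [] :=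
            List.filter_eq_nil_iff.mpr (fun x hx => by have := hg2 x hx; simp; omega)
          have e4' : g2.filter (fun x => decide (x < m)) = [] :=
            List.filter_eq_nil_iff.mpr (fun x hx => by have := hg2 x hx; simp; omega)
          rw [hgsplit, List.filter_append, List.filter_append, List.filter_cons, List.filter_cons,
            e1', e2', e3', e4']
          simp
        · refine (List.map_congr_left (fun gr hgr => ?_)).symm
          obtain ⟨j, hj, hgrj⟩ := List.mem_iff_getElem.mp hgr
          have hjlen : gim + 1 + j < pvCnt G m := by
            have := hj; rw [List.length_drop, hTlen] at this; omega
          have hgr1 : gr.1 = G[gim + 1 + j] := by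
            rw [← hgrj, List.getElem_drop, List.getElem_take, List.getElem_zip]
          congr 1
          refine List.filter_congr (fun x hx => ?_)
          have hxm : x ≠ m := by
            intro rfl
            refine PartOK_disj hp (by omega : gim + 1 + j < G.length) hgim (by omega) ?_ hmm
            rw [pvGetD_eq G (gim + 1 + j) [] (by omega), ← hgr1]
            exact hx
          rw [decide_eq_decide]
          omega

-- ---------- the collection loop returns exactly B's groups ----------

theorem collect_values {n : Nat} {G : List (List Nat)} {rt p : List Nat}
    (hp : PartOK n G) (hu : UFOK n p G rt) : (pvCollect n p).2.values = G := by
  have hitems := (collect_items hp hu.2.1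
    (fun gi gj hgi hgj hne => UFOK_roots_ne hp hu hgi hgj hne) n (le_refl n) p hu).2
  have hv : (pvCollect n p).2.values = (pvCollect n p).2.items.map (fun x => x.2) := rfl
  have hred : (pvCollect n p) = (List.range n).foldl (fun st i =>
      ((pvFind n st.1 i).1, st.2.insert (pvFind n st.1 i).2 (st.2.getD (pvFind n st.1 i).2 [] ++ [i])))
      (p, (PySem.Dict.empty : PySem.Dict Nat (List Nat))) := rfl
  rw [hv, hred, hitems]
  have hcn : pvCnt G n = G.length := by
    unfold pvCnt
    rw [show G.length = (G.map (fun g => g.headD 0)).length from (List.length_map _).symm]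
    refine List.countP_eq_length.mpr (fun h hmem => ?_)
    obtain ⟨g, hg2, rfl⟩ := List.mem_map.mp hmem
    obtain ⟨j, hj, hEq⟩ := List.mem_iff_getElem.mp hg2
    have hnil : g ≠ [] := (hp.2.1 g hg2).1
    have hmemh : g.headD 0 ∈ G.getD j [] := by
      rw [pvGetD_eq G j [] hj, hEq]; exact head_mem hnil
    simpa using PartOK_mem_lt hp hj hmemh
  rw [hcn]
  have hZlen : (G.zip rt).length = G.length := by rw [List.length_zip, hu.2.1]; omega
  rw [List.take_of_length_le (by omega), List.map_map]
  have hcomp : ((fun x : Nat × List Nat => x.2) ∘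
      (fun gr : List Nat × Nat => (gr.2, gr.1.filter (fun x => decide (x < n)))))
      = fun gr : List Nat × Nat => gr.1.filter (fun x => decide (x < n)) := rfl
  rw [hcomp]
  have hfil : (G.zip rt).map (fun gr : List Nat × Nat => gr.1.filter (fun x => decide (x < n)))
      = (G.zip rt).map (fun gr => gr.1) := by
    refine List.map_congr_left (fun gr hgr => ?_)
    refine List.filter_eq_self.mpr (fun x hx => ?_)
    have hgr' : (gr.1, gr.2) ∈ G.zip rt := by simpa using hgr
    obtain ⟨j, hj, hEq⟩ := List.mem_iff_getElem.mp (List.of_mem_zip hgr').1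
    have hxj : x ∈ G.getD j [] := by rw [pvGetD_eq G j [] hj, hEq]; exact hx
    simpa using PartOK_mem_lt hp hj hxj
  rw [hfil]
  exact List.map_fst_zip (le_of_eq hu.2.1.symm)

-- ---------- A's match-count distance equals B's mismatch count ----------

theorem pvCountP_not_add (p : Nat → Bool) : ∀ (l : List Nat),
    l.countP (fun c => !(p c)) + l.countP p = l.length := by
  intro l
  induction l with
  | nil => rfl
  | cons a t IH =>
    rw [List.countP_cons, List.countP_cons, List.length_cons]
    cases h : p a <;> simp [h] <;> omega

theorem pvHam_eq (s1 s2 : List Char) : pvHamA s1 s2 = pvHamB s1 s2 := by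
  show (s1.length : Int) - (List.range s1.length).foldl
      (fun m c => if s1.getD c ' ' = s2.getD c '?' then m + 1 else m) (0 : Int)
    = (((List.range s1.length).countP (fun c => !(s1.getD c ' ' == s2.getD c '?')) : Nat) : Int)
  have hfold := PySem.List.foldl_count_if
    (fun c => decide (s1.getD c ' ' = s2.getD c '?')) (List.range s1.length) 0
  simp only [decide_eq_true_eq] at hfold
  rw [hfold]
  have hc1 : (List.range s1.length).countP (fun c => decide (s1.getD c ' ' = s2.getD c '?'))
      = (List.range s1.length).countP (fun c => s1.getD c ' ' == s2.getD c '?') := by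
    refine List.countP_congr (fun x _ => ?_)
    simp
  rw [hc1]
  have hadd := pvCountP_not_add (fun c => s1.getD c ' ' == s2.getD c '?') (List.range s1.length)
  simp only [List.length_range] at hadd
  omega

-- ---------- the two edge lists agree ----------

theorem flatMap_congr_mem {α β : Type} (l : List α) (f g : α → List β)
    (h : ∀ x ∈ l, f x = g x) : l.flatMap f = l.flatMap g := by
  induction l with
  | nil => rfl
  | cons a t IH =>
    rw [List.flatMap_cons, List.flatMap_cons, h a List.mem_cons_self,
      IH (fun x hx => h x (List.mem_cons_of_mem a hx))]

theorem pvEdges_eq (gs : List (List Char)) (n : Nat) :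
    pvEdgesA gs n = pvEdgesB gs n := by
  unfold pvEdgesA pvEdgesB
  have hfn : (fun (E : List (Nat × Nat × Int)) i =>
      (List.range' (i + 1) (n - (i + 1))).foldl (fun E' j =>
        E' ++ [(i, j, pvHamA (gs.getD i []) (gs.getD j []))]) E)
      = fun E i => E ++ (List.range' (i + 1) (n - (i + 1))).map (fun j =>
        (i, j, pvHamA (gs.getD i []) (gs.getD j []))) := by
    funext E i
    rw [PySem.List.foldl_append_singleton_eq_map]
  rw [hfn, PySem.List.foldl_append_eq_flatMap, List.nil_append]
  refine flatMap_congr_mem _ _ _ (fun i hi => ?_)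
  refine List.map_congr_left (fun j hj => ?_)
  rw [pvHam_eq]

-- ---------- the initial state ----------

theorem flatten_singletons : ∀ (l : List Nat), (l.map (fun i => [i])).flatten = l := by
  intro l
  induction l with
  | nil => rfl
  | cons a t IH => simp [IH]

theorem init_PartOK (n : Nat) : PartOK n ((List.range n).map (fun i => [i])) := by
  refine ⟨?_, ?_, ?_⟩
  · rw [flatten_singletons]
  · intro g hg
    obtain ⟨i, _, rfl⟩ := List.mem_map.mp hg
    exact ⟨by simp, by simp⟩
  · rw [List.map_map]
    have hid : ((fun g : List Nat => g.headD 0) ∘ fun i => [i]) = id := by funext i; rfl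
    rw [hid, List.map_id]
    exact List.pairwise_lt_range

theorem init_UFOK (n : Nat) :
    UFOK n (List.range n) ((List.range n).map (fun i => [i])) (List.range n) := by
  refine ⟨List.length_range, by rw [List.length_map], ?_⟩
  intro gi hgi
  have hgi' : gi < n := by simpa using hgi
  have hG : ((List.range n).map (fun i => [i])).getD gi [] = [gi] := by
    rw [pvGetD_eq _ _ _ hgi, List.getElem_map, List.getElem_range]
  have hrt : (List.range n).getD gi 0 = gi := by
    rw [pvGetD_eq _ _ _ (by simpa using hgi'), List.getElem_range]
  rw [hG, hrt]
  refine ⟨List.mem_singleton.mpr rfl, ?_, ?_⟩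
  · rw [pvGetD_eq _ _ _ (by simpa using hgi'), List.getElem_range]
  · intro i hi
    rw [List.mem_singleton.mp hi]
    exact ⟨0, by simp, rfl⟩

-- ===== VERDICT (by name: the statement is the Claim_ definition above) =====
set_option maxHeartbeats 1000000 in
theorem find_animal_groups_spec : Claim_equal_find_animal_groups := by
  unfold Claim_equal_find_animal_groups
  intro animals k _ _
  unfold Spec_find_animal_groups
  show find_animal_groups animals k = find_animal_groups_alt animals k
  show (pvCollect animals.length (pvLoopA k animals.length
        (PySem.List.sorted (pvEdgesA (animals.map (fun a => a.2.toList)) animals.length)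
          (fun e => e.2.2) false)
        (animals.length : Int) (List.range animals.length)
        (List.replicate animals.length 0)).1).2.values.map
      (fun c => c.map (fun i => (animals.getD i ("", "")).1))
    = (pvLoopB k
        (PySem.List.sorted (pvEdgesB (animals.map (fun a => a.2.toList)) animals.length)
          (fun e => e.2.2) false)
        animals.length (animals.length + 1)
        ((List.range animals.length).map (fun i => [i]))).map
      (fun g => g.map (fun i => (animals.getD i ("", "")).1))
  rw [pvEdges_eq]
  have hG0len : ((List.range animals.length).map (fun i : Nat => [i])).length = animals.length := by
    rw [List.length_map, List.length_range]
  have hSrange : ∀ e ∈ PySem.List.sorted (pvEdgesB (animals.map (fun a => a.2.toList)) animals.length)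
      (fun e => e.2.2) false, e.1 < animals.length ∧ e.2.1 < animals.length := by
    intro e he
    have heE : e ∈ pvEdgesB (animals.map (fun a => a.2.toList)) animals.length :=
      (PySem.List.sorted_perm _ _ _).mem_iff.mp he
    unfold pvEdgesB at heE
    obtain ⟨i, hi, hmem⟩ := List.mem_flatMap.mp heE
    obtain ⟨j, hj, rfl⟩ := List.mem_map.mp hmem
    obtain ⟨t, ht, rfl⟩ := List.mem_range'.mp hj
    have hiN : i < animals.length := List.mem_range.mp hi
    exact ⟨by simpa using hiN, by simp; omega⟩
  set S := PySem.List.sorted (pvEdgesB (animals.map (fun a => a.2.toList)) animals.length)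
      (fun e => e.2.2) false with hSdef
  set G0 := (List.range animals.length).map (fun i : Nat => [i]) with hG0def
  obtain ⟨hpartF, rtF, hufF⟩ := pvSim k animals.length S hSrange S [] G0
    (List.range animals.length) (List.range animals.length)
    (List.replicate animals.length 0) (animals.length + 1)
    (List.nil_append _).symm
    (fun e he => absurd he (List.not_mem_nil))
    (init_PartOK animals.length) (init_UFOK animals.length)
    (by rw [hG0len]; omega)
  rw [hG0len] at hufF
  rw [collect_values hpartF hufF]
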